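-- pv_equiv track=rewrite | github.com/mongodb/mongo | buildscripts/check_for_noexcept.py | get_nonmatching_blocks
-- ===== SOURCE A (Python) =====
-- import difflib
--
-- def get_matching_blocks(lhs: str, rhs: str) -> list[tuple[int, int, int, int]]:
--     """
--     Find the (line-level) matching blocks between the two given strings, representing the left-hand
--     side (lhs) and right-hand side (rhs) of a file with a diff. That is, they represent the file's
--     contents before (lhs) and after (rhs) the change. Return value is a tuple of (lhs_start,
--     lhs_end, rhs_start, rhs_end) for each matching block. Unlike difflib's
--     SequenceMatcher.get_matching_blocks, we do not return the dummy size-0 block at the end.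
--     """
--     lhs_lines = lhs.splitlines()
--     rhs_lines = rhs.splitlines()
--     matcher = difflib.SequenceMatcher(None, lhs_lines, rhs_lines, autojunk=False)
--     blocks = matcher.get_matching_blocks()
--     line_diffs = []
--     for block in blocks:
--         if block.size == 0:
--             # The last block is a dummy block a and b set to the sequence lengths and size 0.
--             # We don't return such a block since we don't need it.
--             break
--         lhs_start = block.a
--         rhs_start = block.b
--         line_diffs.append((lhs_start, lhs_start + block.size, rhs_start, rhs_start + block.size))
--     return line_diffs
--
-- def get_nonmatching_blocks(lhs: str, rhs: str) -> list[tuple[int, int, int, int]]: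
--     matches = get_matching_blocks(lhs, rhs)
--     lhs_index = 0
--     rhs_index = 0
--     blocks = []
--     lhs_line_count = len(lhs.splitlines())
--     rhs_line_count = len(rhs.splitlines())
--     for lhs_start, lhs_end, rhs_start, rhs_end in matches:
--         if lhs_index < lhs_start or rhs_index < rhs_start:
--             blocks.append((lhs_index, lhs_start, rhs_index, rhs_start))
--         lhs_index = lhs_end
--         rhs_index = rhs_end
--     if lhs_index < lhs_line_count or rhs_index < rhs_line_count:
--         blocks.append((lhs_index, lhs_line_count, rhs_index, rhs_line_count))
--     return blocks
-- ===== SOURCE B (Python) =====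
-- def get_nonmatching_blocks(lhs: str, rhs: str) -> list[tuple[int, int, int, int]]:
--     # Self-contained line diff: a classic longest-common-substring DP (one row of run
--     # lengths at a time, first maximum in row-major order wins) replaces difflib's
--     # hash-indexed matcher, and the gaps are emitted directly in order from a worklist
--     # of regions, so no matching-block list, sort, merge or index bookkeeping is needed.
--     a = lhs.splitlines()
--     b = rhs.splitlines()
--
--     def best_match(alo, ahi, blo, bhi):
--         besti, bestj, bestsize = alo, blo, 0
--         width = bhi - blo
--         prev = [0] * width
--         for i in range(alo, ahi):
--             cur = [0] * width
--             for j in range(blo, bhi):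
--                 if a[i] == b[j]:
--                     k = (prev[j - blo - 1] if j > blo else 0) + 1
--                     cur[j - blo] = k
--                     if k > bestsize:
--                         besti, bestj, bestsize = i - k + 1, j - k + 1, k
--             prev = cur
--         return besti, bestj, bestsize
--
--     blocks = []
--     pending = [(0, len(a), 0, len(b))]
--     while pending:
--         alo, ahi, blo, bhi = pending.pop()
--         i, j, k = best_match(alo, ahi, blo, bhi)
--         if k:
--             # left half on top of the worklist: gaps come out already in order
--             pending.append((i + k, ahi, j + k, bhi))
--             pending.append((alo, i, blo, j))
--         elif alo < ahi or blo < bhi: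
--             blocks.append((alo, ahi, blo, bhi))
--     return blocks
-- ===== Notes on version B (the rewrite author's own statement) =====
-- stated objective: alternative
-- what changed: B is a self-contained diff: a classic longest-common-substring row-DP table (plain run-length lists, no hash index b2j/j2len and no extension loops) finds each best match, and an in-order worklist emits the non-matching gaps directly, replacing A's difflib pipeline of matching-block queue + sort + adjacent-merge followed by a gap-inversion scan with a trailing check.
import Mathlib
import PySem

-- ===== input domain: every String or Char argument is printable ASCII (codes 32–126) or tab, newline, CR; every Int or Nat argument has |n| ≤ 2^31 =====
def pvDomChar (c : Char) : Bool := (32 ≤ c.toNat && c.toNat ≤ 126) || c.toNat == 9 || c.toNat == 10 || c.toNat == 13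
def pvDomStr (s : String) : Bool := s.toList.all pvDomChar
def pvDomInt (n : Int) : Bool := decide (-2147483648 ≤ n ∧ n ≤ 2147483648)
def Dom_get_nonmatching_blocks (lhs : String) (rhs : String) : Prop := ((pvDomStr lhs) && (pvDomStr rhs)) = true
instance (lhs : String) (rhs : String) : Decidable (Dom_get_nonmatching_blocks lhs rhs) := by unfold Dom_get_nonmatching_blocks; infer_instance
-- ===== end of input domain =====

-- B replaces A's difflib pipeline (hash-indexed matcher, matching-block queue + sort + merge,
-- then a gap scan with a trailing check) by a classic longest-common-substring row DP and a
-- worklist that emits each non-matching gap directly, in order (objective: alternative).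

-- ===== PORT A =====
-- A calls difflib; CPython's SequenceMatcher with autojunk=False and no isjunk is ported
-- step for step below.

-- b2j: for j, line in enumerate(b): b2j.setdefault(line, []).append(j)
def pvB2j : List String → Nat → PySem.Dict String (List Nat) → PySem.Dict String (List Nat)
  | [], _, d => d
  | line :: rest, j, d => pvB2j rest (j + 1) (d.insert line (d.getD line [] ++ [j]))

-- inner loop of find_longest_match over b2j[a[i]] (list js);
-- Python's j2len.get(j-1, 0): the key -1 (when j = 0) is never present, so 'if j = 0 then 0' is exact.
def pvFlmInner (blo bhi i : Nat) (j2len : PySem.Dict Nat Nat) :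
    List Nat → PySem.Dict Nat Nat → (Nat × Nat × Nat) → PySem.Dict Nat Nat × (Nat × Nat × Nat)
  | [], newj2len, best => (newj2len, best)
  | j :: rest, newj2len, best =>
    if j < blo then pvFlmInner blo bhi i j2len rest newj2len best
    else if bhi ≤ j then (newj2len, best)  -- Python: break
    else
      let k := (if j = 0 then 0 else j2len.getD (j - 1) 0) + 1
      -- besti = i-k+1, bestj = j-k+1: k ≤ i+1 and k ≤ j+1 in every run, so Nat '+1-k' is exact
      let best' := if best.2.2 < k then (i + 1 - k, j + 1 - k, k) else best
      pvFlmInner blo bhi i j2len rest (newj2len.insert j k) best'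

-- outer loop of find_longest_match over i in range(alo, ahi)
def pvFlmOuter (al : List String) (b2j : PySem.Dict String (List Nat)) (blo bhi : Nat) :
    List Nat → PySem.Dict Nat Nat → (Nat × Nat × Nat) → (Nat × Nat × Nat)
  | [], _, best => best
  | i :: rest, j2len, best =>
    let r := pvFlmInner blo bhi i j2len (b2j.getD (al.getD i "") []) PySem.Dict.empty best
    pvFlmOuter al b2j blo bhi rest r.1 r.2

-- while besti > alo and bestj > blo and a[besti-1] == b[bestj-1]: ...
def pvExtendLeft (al bl : List String) (alo blo : Nat) : (Nat × Nat × Nat) → (Nat × Nat × Nat)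
  | (besti, bestj, bestsize) =>
    if h : alo < besti ∧ blo < bestj ∧ al.getD (besti - 1) "" = bl.getD (bestj - 1) "" then
      pvExtendLeft al bl alo blo (besti - 1, bestj - 1, bestsize + 1)
    else (besti, bestj, bestsize)
  termination_by b => b.1
  decreasing_by omega

-- while besti+bestsize < ahi and bestj+bestsize < bhi and a[besti+bestsize] == b[bestj+bestsize]: ...
def pvExtendRight (al bl : List String) (ahi bhi : Nat) : (Nat × Nat × Nat) → (Nat × Nat × Nat)
  | (besti, bestj, bestsize) =>
    if h : besti + bestsize < ahi ∧ bestj + bestsize < bhi ∧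
        al.getD (besti + bestsize) "" = bl.getD (bestj + bestsize) "" then
      pvExtendRight al bl ahi bhi (besti, bestj, bestsize + 1)
    else (besti, bestj, bestsize)
  termination_by b => ahi - (b.1 + b.2.2)
  decreasing_by omega

-- find_longest_match(alo, ahi, blo, bhi); with autojunk=False and no isjunk the two
-- junk-extension loops of CPython are no-ops and are omitted.
def pvFindLongestMatch (al bl : List String) (b2j : PySem.Dict String (List Nat))
    (alo ahi blo bhi : Nat) : Nat × Nat × Nat :=
  let best := pvFlmOuter al b2j blo bhi (List.range' alo (ahi - alo)) PySem.Dict.empty (alo, blo, 0)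
  pvExtendRight al bl ahi bhi (pvExtendLeft al bl alo blo best)

-- the queue loop of difflib's get_matching_blocks; the head of the list is the top of Python's
-- stack (append left, append right, pop right first).  fuel only makes the recursion total:
-- every run pops at most 2*(la+lb)+1 regions, so the fuel passed below never runs out.
def pvQloop (al bl : List String) (b2j : PySem.Dict String (List Nat)) :
    Nat → List (Nat × Nat × Nat × Nat) → List (Nat × Nat × Nat) → List (Nat × Nat × Nat)
  | 0, _, acc => acc
  | _ + 1, [], acc => acc
  | fuel + 1, (alo, ahi, blo, bhi) :: q, acc =>
    let x := pvFindLongestMatch al bl b2j alo ahi blo bhi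
    if x.2.2 ≠ 0 then
      let q1 := if alo < x.1 ∧ blo < x.2.1 then (alo, x.1, blo, x.2.1) :: q else q
      let q2 := if x.1 + x.2.2 < ahi ∧ x.2.1 + x.2.2 < bhi then
          (x.1 + x.2.2, ahi, x.2.1 + x.2.2, bhi) :: q1 else q1
      pvQloop al bl b2j fuel q2 (acc ++ [x])
    else pvQloop al bl b2j fuel q acc

-- merging of adjacent blocks (i1 = j1 = k1 = 0 initially; append (i1,j1,k1) only when k1 != 0)
def pvMergeAdj : Nat → Nat → Nat → List (Nat × Nat × Nat) → List (Nat × Nat × Nat)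
  | i1, j1, k1, [] => if k1 ≠ 0 then [(i1, j1, k1)] else []
  | i1, j1, k1, (i2, j2, k2) :: rest =>
    if i1 + k1 = i2 ∧ j1 + k1 = j2 then pvMergeAdj i1 j1 (k1 + k2) rest
    else (if k1 ≠ 0 then [(i1, j1, k1)] else []) ++ pvMergeAdj i2 j2 k2 rest

-- difflib's get_matching_blocks(), dummy block included.  matching_blocks.sort(): the found
-- blocks have pairwise distinct first components (they come from pairwise disjoint regions), so
-- the stable sort on the key (a, b) is Python's tuple sort.
def pvMatchingBlocks (al bl : List String) : List (Nat × Nat × Nat) :=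
  let b2j := pvB2j bl 0 PySem.Dict.empty
  let raw := pvQloop al bl b2j (2 * (al.length + bl.length) + 8) [(0, al.length, 0, bl.length)] []
  pvMergeAdj 0 0 0 (PySem.List.sorted2 raw (·.1) (·.2.1)) ++ [(al.length, bl.length, 0)]

-- A's get_matching_blocks helper: the for-loop with break at the first size-0 block
def pvA_lineDiffs : List (Nat × Nat × Nat) → List (Int × Int × Int × Int)
  | [] => []
  | (a, b, size) :: rest =>
    if size = 0 then []
    else ((a : Int), (a : Int) + (size : Int), (b : Int), (b : Int) + (size : Int)) :: pvA_lineDiffs rest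

-- the main for-loop of A over matches, state (lhs_index, rhs_index), plus the trailing gap check
def pvA_loop (lcount rcount : Int) : Int → Int → List (Int × Int × Int × Int) → List (Int × Int × Int × Int)
  | li, ri, [] => if li < lcount ∨ ri < rcount then [(li, lcount, ri, rcount)] else []
  | li, ri, (ls, _le, rs, _re) :: rest =>
    (if li < ls ∨ ri < rs then [(li, ls, ri, rs)] else []) ++ pvA_loop lcount rcount _le _re rest

def get_nonmatching_blocks (lhs : String) (rhs : String) : List (Int × Int × Int × Int) :=
  let ll := PySem.Str.splitlines lhs
  let rl := PySem.Str.splitlines rhs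
  pvA_loop (ll.length : Int) (rl.length : Int) 0 0 (pvA_lineDiffs (pvMatchingBlocks ll rl))

-- ===== PORT B =====
-- best_match's inner loop: for j in range(blo, bhi): if a[i] == b[j]: ...
-- (k = i-k+1 etc.: k ≤ i+1 and k ≤ j+1 in every run, so Nat '+1-k' is exact)
def pvRowInner (al bl : List String) (blo i : Nat) (prev : List Nat) :
    List Nat → List Nat → (Nat × Nat × Nat) → List Nat × (Nat × Nat × Nat)
  | [], cur, best => (cur, best)
  | j :: rest, cur, best =>
    if al.getD i "" = bl.getD j "" then
      let k := (if blo < j then prev.getD (j - blo - 1) 0 else 0) + 1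
      let best' := if best.2.2 < k then (i + 1 - k, j + 1 - k, k) else best
      pvRowInner al bl blo i prev rest (cur.set (j - blo) k) best'
    else pvRowInner al bl blo i prev rest cur best

-- best_match's outer loop: for i in range(alo, ahi): cur = [0]*width; ...; prev = cur
def pvRowOuter (al bl : List String) (blo bhi : Nat) :
    List Nat → List Nat → (Nat × Nat × Nat) → (Nat × Nat × Nat)
  | [], _, best => best
  | i :: rest, prev, best =>
    let r := pvRowInner al bl blo i prev (List.range' blo (bhi - blo))
      (List.replicate (bhi - blo) 0) best
    pvRowOuter al bl blo bhi rest r.1 r.2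

def pvBestMatch (al bl : List String) (alo ahi blo bhi : Nat) : Nat × Nat × Nat :=
  pvRowOuter al bl blo bhi (List.range' alo (ahi - alo)) (List.replicate (bhi - blo) 0)
    (alo, blo, 0)

-- the while-loop over the pending worklist: pop a region, split it at its best match (left part
-- pushed on top, so gaps come out in order) or emit it as a gap when there is no match.
-- fuel only makes the loop total: every run pops at most 2*(la+lb)+1 regions.
def pvBwork (al bl : List String) :
    Nat → List (Nat × Nat × Nat × Nat) → List (Int × Int × Int × Int) → List (Int × Int × Int × Int)
  | 0, _, blocks => blocks
  | _ + 1, [], blocks => blocks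
  | fuel + 1, (alo, ahi, blo, bhi) :: st, blocks =>
    let m := pvBestMatch al bl alo ahi blo bhi
    if m.2.2 ≠ 0 then
      pvBwork al bl fuel ((alo, m.1, blo, m.2.1) :: (m.1 + m.2.2, ahi, m.2.1 + m.2.2, bhi) :: st)
        blocks
    else if alo < ahi ∨ blo < bhi then
      pvBwork al bl fuel st (blocks ++ [((alo : Int), (ahi : Int), (blo : Int), (bhi : Int))])
    else pvBwork al bl fuel st blocks

def get_nonmatching_blocks_alt (lhs : String) (rhs : String) : List (Int × Int × Int × Int) :=
  let al := PySem.Str.splitlines lhs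
  let bl := PySem.Str.splitlines rhs
  pvBwork al bl (2 * (al.length + bl.length) + 8) [(0, al.length, 0, bl.length)] []

-- ===== PRECONDITION & SPEC =====
def Spec_get_nonmatching_blocks (lhs : String) (rhs : String) (out : List (Int × Int × Int × Int)) : Prop := out = get_nonmatching_blocks_alt lhs rhs
instance (lhs : String) (rhs : String) (out : List (Int × Int × Int × Int)) : Decidable (Spec_get_nonmatching_blocks lhs rhs out) := by unfold Spec_get_nonmatching_blocks; infer_instance

-- ===== CLAIM (what is proved, stated in full; the proofs are below) =====
def Claim_equal_get_nonmatching_blocks : Prop := ∀ (lhs : String) (rhs : String), Dom_get_nonmatching_blocks lhs rhs → Spec_get_nonmatching_blocks lhs rhs (get_nonmatching_blocks lhs rhs)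

-- ===== LEMMAS AND PROOFS =====

-- ==== part 1: the two matchers agree ====

-- run length of the common diagonal ending at cell (i, j), cut off at the region's low edges
def pvRl (al bl : List String) (alo blo : Nat) : Nat → Nat → Nat
  | i, j =>
    if al.getD i "" = bl.getD j "" then
      (if _h : alo < i ∧ blo < j then pvRl al bl alo blo (i - 1) (j - 1) else 0) + 1
    else 0
  termination_by i _ => i
  decreasing_by omega

-- the canonical per-cell best update both matchers perform
def pvCell (al bl : List String) (alo blo i : Nat) (best : Nat × Nat × Nat) (j : Nat) :
    Nat × Nat × Nat :=
  let k := pvRl al bl alo blo i j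
  if best.2.2 < k then (i + 1 - k, j + 1 - k, k) else best

def pvSpecBest (al bl : List String) (alo ahi blo bhi : Nat) : Nat × Nat × Nat :=
  (List.range' alo (ahi - alo)).foldl
    (fun b i => (List.range' blo (bhi - blo)).foldl (pvCell al bl alo blo i) b) (alo, blo, 0)

theorem pvRl_nonmatch (al bl : List String) (alo blo i j : Nat)
    (h : ¬ al.getD i "" = bl.getD j "") : pvRl al bl alo blo i j = 0 := by
  rw [pvRl, if_neg h]

theorem pvRl_matchpos (al bl : List String) (alo blo i j : Nat)
    (h : al.getD i "" = bl.getD j "") : 0 < pvRl al bl alo blo i j := by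
  rw [pvRl, if_pos h]; omega

theorem pvRl_succ (al bl : List String) (alo blo i j : Nat)
    (h : al.getD i "" = bl.getD j "") (h1 : alo < i) (h2 : blo < j) :
    pvRl al bl alo blo i j = pvRl al bl alo blo (i - 1) (j - 1) + 1 := by
  rw [pvRl, if_pos h, dif_pos ⟨h1, h2⟩]

theorem pvRl_le (al bl : List String) (alo blo : Nat) :
    ∀ i j, pvRl al bl alo blo i j ≤ i + 1 ∧ pvRl al bl alo blo i j ≤ j + 1 := by
  intro i
  induction i using Nat.strong_induction_on with
  | _ i ih =>
    intro j
    rw [pvRl]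
    by_cases hm : al.getD i "" = bl.getD j ""
    · simp only [if_pos hm]
      by_cases hh : alo < i ∧ blo < j
      · have := ih (i - 1) (by omega) (j - 1)
        rw [dif_pos hh]
        omega
      · rw [dif_neg hh]
        omega
    · rw [if_neg hm]
      omega

-- a positive run cannot be extended to its upper left: its start cell sits on the region's
-- low edge or the cell before it does not match
theorem pvRl_start (al bl : List String) (alo blo : Nat) :
    ∀ i j, 0 < pvRl al bl alo blo i j →
      ¬(alo < i + 1 - pvRl al bl alo blo i j ∧ blo < j + 1 - pvRl al bl alo blo i j ∧
        al.getD (i - pvRl al bl alo blo i j) "" = bl.getD (j - pvRl al bl alo blo i j) "") := by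
  intro i
  induction i using Nat.strong_induction_on with
  | _ i ih =>
    intro j hpos hcon
    by_cases hm : al.getD i "" = bl.getD j ""
    · by_cases hh : alo < i ∧ blo < j
      · have hk : pvRl al bl alo blo i j = pvRl al bl alo blo (i - 1) (j - 1) + 1 :=
          pvRl_succ al bl alo blo i j hm hh.1 hh.2
        set t := pvRl al bl alo blo (i - 1) (j - 1) with ht
        rcases Nat.eq_zero_or_pos t with ht0 | htpos
        · -- run of length 1: the previous cell does not match
          have hnm : ¬ al.getD (i - 1) "" = bl.getD (j - 1) "" := by
            intro hmm
            have := pvRl_matchpos al bl alo blo (i - 1) (j - 1) hmm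
            omega
          rw [hk, ht0] at hcon
          exact hnm (by simpa using hcon.2.2)
        · have hle := pvRl_le al bl alo blo (i - 1) (j - 1)
          rw [hk] at hcon
          refine ih (i - 1) (by omega) (j - 1) htpos ⟨by omega, by omega, ?_⟩
          rw [← ht]
          have e1 : i - 1 - t = i - (t + 1) := by omega
          have e2 : j - 1 - t = j - (t + 1) := by omega
          rw [e1, e2]
          exact hcon.2.2
      · have hk : pvRl al bl alo blo i j = 1 := by
          rw [pvRl, if_pos hm, dif_neg hh]
        rw [hk] at hcon
        exact hh ⟨by omega, by omega⟩
    · rw [pvRl_nonmatch al bl alo blo i j hm] at hpos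
      omega

-- generic fold helpers
theorem pvFoldl_pres {α β : Type} (f : β → α → β) (P : β → Prop) :
    ∀ (l : List α) (init : β), (∀ s a, a ∈ l → P s → P (f s a)) → P init → P (l.foldl f init) := by
  intro l
  induction l with
  | nil => intro init _ h; simpa using h
  | cons a l ih =>
    intro init hstep h
    simp only [List.foldl_cons]
    exact ih _ (fun s b hb => hstep s b (List.mem_cons_of_mem _ hb))
      (hstep init a (List.mem_cons_self ..) h)

theorem pvFoldl_mono {α β : Type} (f : β → α → β) (meas : β → Nat) :
    ∀ (l : List α) (init : β), (∀ s a, a ∈ l → meas s ≤ meas (f s a)) →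
      meas init ≤ meas (l.foldl f init) := by
  intro l
  induction l with
  | nil => intro init _; simp
  | cons a l ih =>
    intro init hstep
    simp only [List.foldl_cons]
    exact (hstep init a (List.mem_cons_self ..)).trans
      (ih _ (fun s b hb => hstep s b (List.mem_cons_of_mem _ hb)))

theorem pvFoldl_hit {α β : Type} (f : β → α → β) (meas : β → Nat) (c : Nat) (a : α) :
    ∀ (l : List α) (init : β), a ∈ l → (∀ s, c ≤ meas (f s a)) →
      (∀ s a', a' ∈ l → meas s ≤ meas (f s a')) → c ≤ meas (l.foldl f init) := by
  intro l
  induction l with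
  | nil => intro init h; simp at h
  | cons x l ih =>
    intro init hmem hhit hmono
    simp only [List.foldl_cons]
    rcases List.mem_cons.mp hmem with h | h
    · subst h
      exact (hhit init).trans (pvFoldl_mono f meas l _
        (fun s b hb => hmono s b (List.mem_cons_of_mem _ hb)))
    · exact ih _ h hhit (fun s b hb => hmono s b (List.mem_cons_of_mem _ hb))

theorem pvFoldl_filter_id {α β : Type} (f : β → α → β) (p : α → Bool) :
    ∀ (l : List α) (init : β), (∀ s a, a ∈ l → p a = false → f s a = s) →
      (l.filter p).foldl f init = l.foldl f init := by
  intro l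
  induction l with
  | nil => intro init _; simp
  | cons a l ih =>
    intro init hid
    by_cases h : p a
    · rw [List.filter_cons_of_pos h]
      simp only [List.foldl_cons]
      exact ih _ (fun s b hb => hid s b (List.mem_cons_of_mem _ hb))
    · rw [List.filter_cons_of_neg (by simpa using h)]
      simp only [List.foldl_cons]
      rw [ih _ (fun s b hb => hid s b (List.mem_cons_of_mem _ hb)),
        hid init a (List.mem_cons_self ..) (by simpa using h)]

theorem pvPairwise_range' (s n : Nat) : (List.range' s n).Pairwise (· < ·) := by
  induction n generalizing s with
  | zero => simp
  | succ n ih =>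
    rw [List.range'_succ]
    exact List.pairwise_cons.mpr ⟨fun m hm => ((List.mem_range'_1).mp hm).1, ih (s + 1)⟩

-- b2j characterization: b2j[s] is the ascending list of positions of s
theorem pvB2j_getD : ∀ (l : List String) (j0 : Nat) (d : PySem.Dict String (List Nat)) (s : String),
    (pvB2j l j0 d).getD s [] =
      d.getD s [] ++ (List.range' j0 l.length).filter (fun j => decide (l.getD (j - j0) "" = s)) := by
  intro l
  induction l with
  | nil => intro j0 d s; simp [pvB2j]
  | cons x rest ih =>
    intro j0 d s
    simp only [pvB2j, List.length_cons]
    rw [ih]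
    have htail : (List.range' (j0 + 1) rest.length).filter
        (fun j => decide ((x :: rest).getD (j - j0) "" = s)) =
        (List.range' (j0 + 1) rest.length).filter
          (fun j => decide (rest.getD (j - (j0 + 1)) "" = s)) := by
      apply List.filter_congr
      intro j hj
      have hj1 := (List.mem_range'_1).mp hj
      have he : j - j0 = (j - (j0 + 1)) + 1 := by omega
      rw [he]
      simp [List.getD]
    rw [List.range'_succ, List.filter_cons, htail]
    simp only [Nat.sub_self, List.getD_cons_zero]
    by_cases hs : x = s
    · simp [PySem.Dict.getD_insert, hs]
    · have hs' : ¬ s = x := fun h => hs h.symm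
      simp [PySem.Dict.getD_insert, hs, hs']

-- the guard-free inner loop (break and skip removed)
def pvFlmP (i : Nat) (j2len : PySem.Dict Nat Nat) :
    List Nat → PySem.Dict Nat Nat → (Nat × Nat × Nat) → PySem.Dict Nat Nat × (Nat × Nat × Nat)
  | [], new, best => (new, best)
  | j :: rest, new, best =>
    let k := (if j = 0 then 0 else j2len.getD (j - 1) 0) + 1
    let best' := if best.2.2 < k then (i + 1 - k, j + 1 - k, k) else best
    pvFlmP i j2len rest (new.insert j k) best'

theorem pvFlmInner_eq_P (blo bhi i : Nat) (d : PySem.Dict Nat Nat) :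
    ∀ (js : List Nat), js.Pairwise (· < ·) →
      ∀ (new : PySem.Dict Nat Nat) (best : Nat × Nat × Nat),
        pvFlmInner blo bhi i d js new best =
          pvFlmP i d (js.filter (fun j => decide (blo ≤ j ∧ j < bhi))) new best := by
  intro js
  induction js with
  | nil => intro _ new best; simp [pvFlmInner, pvFlmP]
  | cons j rest ih =>
    intro hpw new best
    obtain ⟨hhd, htl⟩ := List.pairwise_cons.mp hpw
    simp only [pvFlmInner, List.filter_cons]
    by_cases h1 : j < blo
    · have hp : decide (blo ≤ j ∧ j < bhi) = false := by simp; omega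
      simp only [if_pos h1, hp, Bool.false_eq_true, if_false]
      exact ih htl new best
    · by_cases h2 : bhi ≤ j
      · have hp : decide (blo ≤ j ∧ j < bhi) = false := by simp; omega
        have hrest : rest.filter (fun j => decide (blo ≤ j ∧ j < bhi)) = [] := by
          rw [List.filter_eq_nil_iff]
          intro x hx
          have := hhd x hx
          simp
          omega
        simp only [if_neg h1, if_pos h2, hp, Bool.false_eq_true, if_false, hrest, pvFlmP]
      · have hp : decide (blo ≤ j ∧ j < bhi) = true := by simp; omega
        simp only [if_neg h1, if_neg h2, hp, if_true]
        simp only [pvFlmP]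
        exact ih htl _ _

theorem pvWindowFilter (len blo bhi : Nat) (h2 : bhi ≤ len) (p : Nat → Bool) :
    ((List.range' 0 len).filter p).filter (fun j => decide (blo ≤ j ∧ j < bhi)) =
      (List.range' blo (bhi - blo)).filter p := by
  rw [List.filter_filter]
  by_cases hbb : blo ≤ bhi
  · have hsplit : List.range' 0 len =
        (List.range' 0 blo ++ List.range' blo (bhi - blo)) ++ List.range' bhi (len - bhi) := by
      have h1 : List.range' 0 blo ++ List.range' blo (bhi - blo) = List.range' 0 bhi := by
        have h := (List.range'_append .. :
          List.range' 0 blo 1 ++ List.range' (0 + 1 * blo) (bhi - blo) 1 =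
            List.range' 0 (blo + (bhi - blo)) 1)
        simp only [Nat.one_mul, Nat.zero_add, Nat.add_sub_cancel' hbb] at h
        exact h
      have h2' : List.range' 0 bhi ++ List.range' bhi (len - bhi) = List.range' 0 len := by
        have h := (List.range'_append .. :
          List.range' 0 bhi 1 ++ List.range' (0 + 1 * bhi) (len - bhi) 1 =
            List.range' 0 (bhi + (len - bhi)) 1)
        simp only [Nat.one_mul, Nat.zero_add, Nat.add_sub_cancel' h2] at h
        exact h
      rw [h1, h2']
    rw [hsplit, List.filter_append, List.filter_append]
    have hlo : (List.range' 0 blo).filter (fun a => decide (blo ≤ a ∧ a < bhi) && p a) = [] := by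
      rw [List.filter_eq_nil_iff]
      intro x hx
      have := (List.mem_range'_1).mp hx
      simp
      omega
    have hhi : (List.range' bhi (len - bhi)).filter
        (fun a => decide (blo ≤ a ∧ a < bhi) && p a) = [] := by
      rw [List.filter_eq_nil_iff]
      intro x hx
      have := (List.mem_range'_1).mp hx
      simp
      omega
    have hmid : (List.range' blo (bhi - blo)).filter
        (fun a => decide (blo ≤ a ∧ a < bhi) && p a) = (List.range' blo (bhi - blo)).filter p := by
      apply List.filter_congr
      intro x hx
      have := (List.mem_range'_1).mp hx
      have : decide (blo ≤ x ∧ x < bhi) = true := by simp; omega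
      rw [this, Bool.true_and]
    rw [hlo, hhi, hmid, List.nil_append, List.append_nil]
  · have h0 : bhi - blo = 0 := by omega
    rw [h0]
    simp only [List.range'_zero, List.filter_nil]
    rw [List.filter_eq_nil_iff]
    intro x _
    simp
    omega

theorem pvFlmP_spec (al bl : List String) (alo blo bhi i : Nat) (d : PySem.Dict Nat Nat)
    (hd : ∀ j, d.getD j 0 =
      if blo ≤ j ∧ j < bhi ∧ alo < i then pvRl al bl alo blo (i - 1) j else 0) :
    ∀ (js : List Nat), (∀ j ∈ js, blo ≤ j ∧ j < bhi ∧ al.getD i "" = bl.getD j "") →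
      ∀ (new : PySem.Dict Nat Nat) (best : Nat × Nat × Nat),
        (pvFlmP i d js new best).2 = js.foldl (pvCell al bl alo blo i) best ∧
        ∀ j, (pvFlmP i d js new best).1.getD j 0 =
          if j ∈ js then pvRl al bl alo blo i j else new.getD j 0 := by
  intro js
  induction js with
  | nil =>
    intro _ new best
    refine ⟨rfl, ?_⟩
    intro j
    simp [pvFlmP]
  | cons j rest ih =>
    intro hmem new best
    obtain ⟨hj1, hj2, hm⟩ := hmem j (List.mem_cons_self ..)
    have hk : (if j = 0 then 0 else d.getD (j - 1) 0) + 1 = pvRl al bl alo blo i j := by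
      rw [pvRl, if_pos hm]
      congr 1
      rcases Nat.eq_zero_or_pos j with hj0 | hj0
      · subst hj0
        rw [if_pos rfl, dif_neg (by rintro ⟨hx, hy⟩; omega)]
      · rw [if_neg (by omega), hd (j - 1)]
        by_cases ha : alo < i
        · by_cases hbj : blo < j
          · rw [if_pos ⟨by omega, by omega, ha⟩, dif_pos ⟨ha, hbj⟩]
          · rw [if_neg (by rintro ⟨hx, hy, hz⟩; omega), dif_neg (by rintro ⟨hx, hy⟩; omega)]
        · rw [if_neg (by rintro ⟨hx, hy, hz⟩; omega), dif_neg (by rintro ⟨hx, hy⟩; omega)]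
    simp only [pvFlmP, List.foldl_cons]
    rw [hk]
    obtain ⟨ihA, ihB⟩ := ih (fun x hx => hmem x (List.mem_cons_of_mem _ hx))
      (new.insert j (pvRl al bl alo blo i j))
      (if best.2.2 < pvRl al bl alo blo i j then
        (i + 1 - pvRl al bl alo blo i j, j + 1 - pvRl al bl alo blo i j,
          pvRl al bl alo blo i j) else best)
    constructor
    · rw [ihA]
      rfl
    · intro j'
      rw [ihB j']
      by_cases hjr : j' ∈ rest
      · simp [hjr]
      · by_cases hjj : j' = j
        · subst hjj
          simp [hjr, PySem.Dict.getD_insert]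
        · have hno : j' ∉ j :: rest := by simp [hjj, hjr]
          simp [hjr, hjj, hno, PySem.Dict.getD_insert]

theorem pvFlmOuter_spec (al bl : List String) (b2j : PySem.Dict String (List Nat))
    (hb : ∀ s, b2j.getD s [] =
      (List.range' 0 bl.length).filter (fun j => decide (bl.getD j "" = s)))
    (alo blo bhi : Nat) (hlen : bhi ≤ bl.length) :
    ∀ (n i : Nat) (d : PySem.Dict Nat Nat) (best : Nat × Nat × Nat), alo ≤ i →
      (∀ j, d.getD j 0 =
        if blo ≤ j ∧ j < bhi ∧ alo < i then pvRl al bl alo blo (i - 1) j else 0) →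
      pvFlmOuter al b2j blo bhi (List.range' i n) d best =
        (List.range' i n).foldl
          (fun b i' => (List.range' blo (bhi - blo)).foldl (pvCell al bl alo blo i') b) best := by
  intro n
  induction n with
  | zero => intro i d best _ _; simp [pvFlmOuter]
  | succ n ihn =>
    intro i d best hi hd
    rw [List.range'_succ]
    simp only [pvFlmOuter, List.foldl_cons]
    rw [hb (al.getD i "")]
    rw [pvFlmInner_eq_P blo bhi i d _ (List.Pairwise.filter _ (pvPairwise_range' 0 bl.length))]
    rw [pvWindowFilter bl.length blo bhi hlen _]
    have hmem : ∀ j ∈ (List.range' blo (bhi - blo)).filter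
        (fun j => decide (bl.getD j "" = al.getD i "")),
        blo ≤ j ∧ j < bhi ∧ al.getD i "" = bl.getD j "" := by
      intro j hj
      obtain ⟨hjr, hjp⟩ := List.mem_filter.mp hj
      have hr := (List.mem_range'_1).mp hjr
      exact ⟨by omega, by omega, (of_decide_eq_true hjp).symm⟩
    obtain ⟨hbest, hdict⟩ := pvFlmP_spec al bl alo blo bhi i d hd _ hmem PySem.Dict.empty best
    have hb2 : (pvFlmP i d ((List.range' blo (bhi - blo)).filter
          (fun j => decide (bl.getD j "" = al.getD i ""))) PySem.Dict.empty best).2 =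
        (List.range' blo (bhi - blo)).foldl (pvCell al bl alo blo i) best := by
      rw [hbest]
      apply pvFoldl_filter_id
      intro s j _ hp
      have hnm : ¬ al.getD i "" = bl.getD j "" := by
        intro hmm
        rw [decide_eq_true hmm.symm] at hp
        exact Bool.true_eq_false ▸ hp.symm ▸ rfl
      simp [pvCell, pvRl_nonmatch al bl alo blo i j hnm]
    have hd' : ∀ j, (pvFlmP i d ((List.range' blo (bhi - blo)).filter
          (fun j => decide (bl.getD j "" = al.getD i ""))) PySem.Dict.empty best).1.getD j 0 =
        if blo ≤ j ∧ j < bhi ∧ alo < i + 1 then pvRl al bl alo blo (i + 1 - 1) j else 0 := by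
      intro j
      rw [hdict j, Nat.add_sub_cancel]
      by_cases hjw : blo ≤ j ∧ j < bhi
      · by_cases hjm : al.getD i "" = bl.getD j ""
        · have hmemj : j ∈ (List.range' blo (bhi - blo)).filter
              (fun j => decide (bl.getD j "" = al.getD i "")) :=
            List.mem_filter.mpr ⟨(List.mem_range'_1).mpr ⟨hjw.1, by omega⟩,
              decide_eq_true hjm.symm⟩
          rw [if_pos hmemj, if_pos ⟨hjw.1, hjw.2, by omega⟩]
        · have hnot : j ∉ (List.range' blo (bhi - blo)).filter
              (fun j => decide (bl.getD j "" = al.getD i "")) := by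
            intro hjin
            exact hjm ((of_decide_eq_true (List.mem_filter.mp hjin).2).symm)
          rw [if_neg hnot, if_pos ⟨hjw.1, hjw.2, by omega⟩,
            pvRl_nonmatch al bl alo blo i j hjm]
          simp
      · have hnot : j ∉ (List.range' blo (bhi - blo)).filter
            (fun j => decide (bl.getD j "" = al.getD i "")) := by
          intro hjin
          have := (List.mem_range'_1).mp (List.mem_filter.mp hjin).1
          exact hjw ⟨by omega, by omega⟩
        rw [if_neg hnot, if_neg (by rintro ⟨hx, hy, hz⟩; exact hjw ⟨hx, hy⟩)]
        simp
    rw [ihn (i + 1) _ _ (by omega) hd', hb2]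

theorem pvSetGetD (l : List Nat) (n v m : Nat) :
    (l.set n v).getD m 0 = if m = n ∧ n < l.length then v else l.getD m 0 := by
  by_cases h1 : m = n
  · subst h1
    by_cases h2 : m < l.length
    · simp [List.getD, h2]
    · rw [if_neg (by rintro ⟨_, hx⟩; omega)]
      rw [List.set_eq_of_length_le (by omega)]
  · rw [if_neg (by rintro ⟨hx, _⟩; omega)]
    simp [List.getD, List.getElem?_set_ne (by omega : n ≠ m)]

theorem pvRowInner_spec (al bl : List String) (alo blo bhi i : Nat) (prev : List Nat)
    (hprev : ∀ t, prev.getD t 0 =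
      if t < bhi - blo ∧ alo < i then pvRl al bl alo blo (i - 1) (blo + t) else 0) :
    ∀ (js : List Nat), (∀ j ∈ js, blo ≤ j ∧ j < bhi) →
      ∀ (cur : List Nat) (best : Nat × Nat × Nat), cur.length = bhi - blo →
        (pvRowInner al bl blo i prev js cur best).2 = js.foldl (pvCell al bl alo blo i) best ∧
        (pvRowInner al bl blo i prev js cur best).1.length = bhi - blo ∧
        ∀ t, (pvRowInner al bl blo i prev js cur best).1.getD t 0 =
          if blo + t ∈ js ∧ t < bhi - blo ∧ al.getD i "" = bl.getD (blo + t) "" then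
            pvRl al bl alo blo i (blo + t)
          else cur.getD t 0 := by
  intro js
  induction js with
  | nil =>
    intro _ cur best hlen
    exact ⟨rfl, hlen, fun t => by simp [pvRowInner]⟩
  | cons j rest ih =>
    intro hmem cur best hlen
    obtain ⟨hj1, hj2⟩ := hmem j (List.mem_cons_self ..)
    simp only [pvRowInner]
    by_cases hm : al.getD i "" = bl.getD j ""
    · simp only [if_pos hm]
      have hk : (if blo < j then prev.getD (j - blo - 1) 0 else 0) + 1 =
          pvRl al bl alo blo i j := by
        rw [pvRl, if_pos hm]
        congr 1
        by_cases hbj : blo < j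
        · rw [if_pos hbj, hprev (j - blo - 1)]
          by_cases ha : alo < i
          · rw [if_pos ⟨by omega, ha⟩, dif_pos ⟨ha, hbj⟩]
            congr 1
            omega
          · rw [if_neg (by rintro ⟨hx, hy⟩; omega), dif_neg (by rintro ⟨hx, hy⟩; omega)]
        · rw [if_neg hbj, dif_neg (by rintro ⟨hx, hy⟩; omega)]
      rw [hk]
      obtain ⟨ihA, ihB, ihC⟩ := ih (fun x hx => hmem x (List.mem_cons_of_mem _ hx))
        (cur.set (j - blo) (pvRl al bl alo blo i j))
        (if best.2.2 < pvRl al bl alo blo i j then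
          (i + 1 - pvRl al bl alo blo i j, j + 1 - pvRl al bl alo blo i j,
            pvRl al bl alo blo i j) else best)
        (by rw [List.length_set]; exact hlen)
      refine ⟨?_, ihB, ?_⟩
      · rw [ihA, List.foldl_cons]
        rfl
      · intro t
        rw [ihC t]
        by_cases hin : blo + t ∈ rest ∧ t < bhi - blo ∧ al.getD i "" = bl.getD (blo + t) ""
        · rw [if_pos hin, if_pos ⟨List.mem_cons_of_mem _ hin.1, hin.2⟩]
        · rw [if_neg hin, pvSetGetD]
          by_cases hjt : t = j - blo
          · have hbt : blo + t = j := by omega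
            rw [if_pos ⟨hjt, by omega⟩,
              if_pos ⟨by rw [hbt]; exact List.mem_cons_self .., by omega, by rw [hbt]; exact hm⟩,
              hbt]
          · rw [if_neg (by rintro ⟨hx, _⟩; omega)]
            rw [if_neg ?_]
            rintro ⟨hmm, hw, hmt⟩
            rcases List.mem_cons.mp hmm with he | he
            · omega
            · exact hin ⟨he, hw, hmt⟩
    · simp only [if_neg hm]
      obtain ⟨ihA, ihB, ihC⟩ := ih (fun x hx => hmem x (List.mem_cons_of_mem _ hx)) cur best hlen
      refine ⟨?_, ihB, ?_⟩
      · rw [ihA, List.foldl_cons]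
        congr 1
        simp [pvCell, pvRl_nonmatch al bl alo blo i j hm]
      · intro t
        rw [ihC t]
        have hiff : (blo + t ∈ j :: rest ∧ t < bhi - blo ∧
            al.getD i "" = bl.getD (blo + t) "") ↔
            (blo + t ∈ rest ∧ t < bhi - blo ∧ al.getD i "" = bl.getD (blo + t) "") := by
          constructor
          · rintro ⟨hmm, hw, hmt⟩
            rcases List.mem_cons.mp hmm with he | he
            · exact absurd (he ▸ hmt) hm
            · exact ⟨he, hw, hmt⟩
          · rintro ⟨hmm, hw, hmt⟩
            exact ⟨List.mem_cons_of_mem _ hmm, hw, hmt⟩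
        rw [if_congr hiff rfl rfl]

theorem pvRowOuter_spec (al bl : List String) (alo blo bhi : Nat) :
    ∀ (n i : Nat) (prev : List Nat) (best : Nat × Nat × Nat), alo ≤ i →
      (∀ t, prev.getD t 0 =
        if t < bhi - blo ∧ alo < i then pvRl al bl alo blo (i - 1) (blo + t) else 0) →
      pvRowOuter al bl blo bhi (List.range' i n) prev best =
        (List.range' i n).foldl
          (fun b i' => (List.range' blo (bhi - blo)).foldl (pvCell al bl alo blo i') b) best := by
  intro n
  induction n with
  | zero => intro i prev best _ _; simp [pvRowOuter]
  | succ n ihn =>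
    intro i prev best hi hprev
    rw [List.range'_succ]
    simp only [pvRowOuter, List.foldl_cons]
    have hmemw : ∀ j ∈ List.range' blo (bhi - blo), blo ≤ j ∧ j < bhi := by
      intro j hj
      have := (List.mem_range'_1).mp hj
      exact ⟨by omega, by omega⟩
    obtain ⟨hA, hB, hC⟩ := pvRowInner_spec al bl alo blo bhi i prev hprev _ hmemw
      (List.replicate (bhi - blo) 0) best (by simp)
    have hrep : ∀ t, (List.replicate (bhi - blo) (0 : Nat)).getD t 0 = 0 := by
      intro t
      by_cases h : t < bhi - blo <;> simp [List.getD, h]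
    have hd' : ∀ t, (pvRowInner al bl blo i prev (List.range' blo (bhi - blo))
          (List.replicate (bhi - blo) 0) best).1.getD t 0 =
        if t < bhi - blo ∧ alo < i + 1 then pvRl al bl alo blo (i + 1 - 1) (blo + t) else 0 := by
      intro t
      rw [hC t, Nat.add_sub_cancel]
      by_cases hw : t < bhi - blo
      · by_cases hmt : al.getD i "" = bl.getD (blo + t) ""
        · rw [if_pos ⟨(List.mem_range'_1).mpr ⟨by omega, by omega⟩, hw, hmt⟩,
            if_pos ⟨hw, by omega⟩]
        · rw [if_neg (by rintro ⟨_, _, hz⟩; exact hmt hz), if_pos ⟨hw, by omega⟩, hrep,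
            pvRl_nonmatch al bl alo blo i (blo + t) hmt]
      · rw [if_neg (by rintro ⟨hx, _, _⟩; have := (List.mem_range'_1).mp hx; omega),
          if_neg (by rintro ⟨hx, _⟩; omega), hrep]
    rw [ihn (i + 1) _ _ (by omega) hd', hA]

-- shape invariant of the running best: initial, or a positive run with its end cell recorded
def pvQ (al bl : List String) (alo blo : Nat) (best : Nat × Nat × Nat) : Prop :=
  best = (alo, blo, 0) ∨
    ∃ ie je, alo ≤ ie ∧ blo ≤ je ∧ 0 < best.2.2 ∧ best.2.2 = pvRl al bl alo blo ie je ∧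
      best.1 = ie + 1 - best.2.2 ∧ best.2.1 = je + 1 - best.2.2

theorem pvSpec_Q (al bl : List String) (alo ahi blo bhi : Nat) :
    pvQ al bl alo blo (pvSpecBest al bl alo ahi blo bhi) := by
  unfold pvSpecBest
  apply pvFoldl_pres _ (pvQ al bl alo blo)
  · intro s i hi hQ
    apply pvFoldl_pres _ (pvQ al bl alo blo)
    · intro s' j hj hQ'
      have hi' := ((List.mem_range'_1).mp hi).1
      have hj' := ((List.mem_range'_1).mp hj).1
      unfold pvCell
      by_cases hg : s'.2.2 < pvRl al bl alo blo i j
      · rw [if_pos hg]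
        right
        exact ⟨i, j, hi', hj', by simp; omega, by simp, by simp, by simp⟩
      · rw [if_neg hg]
        exact hQ'
    · exact hQ
  · left
    rfl

theorem pvSpec_bound (al bl : List String) (alo ahi blo bhi : Nat) :
    ∀ i0 j0, alo ≤ i0 → i0 < ahi → blo ≤ j0 → j0 < bhi →
      pvRl al bl alo blo i0 j0 ≤ (pvSpecBest al bl alo ahi blo bhi).2.2 := by
  intro i0 j0 h1 h2 h3 h4
  unfold pvSpecBest
  have hmono : ∀ (i : Nat) (s : Nat × Nat × Nat) (j : Nat),
      s.2.2 ≤ (pvCell al bl alo blo i s j).2.2 := by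
    intro i s j
    unfold pvCell
    by_cases hg : s.2.2 < pvRl al bl alo blo i j
    · rw [if_pos hg]; simp; omega
    · rw [if_neg hg]
  refine pvFoldl_hit _ (fun b => b.2.2) (pvRl al bl alo blo i0 j0) i0
    (List.range' alo (ahi - alo)) (alo, blo, 0)
    ((List.mem_range'_1).mpr ⟨h1, by omega⟩) ?_ ?_
  · intro s
    refine pvFoldl_hit _ (fun b => b.2.2) (pvRl al bl alo blo i0 j0) j0
      (List.range' blo (bhi - blo)) s ((List.mem_range'_1).mpr ⟨h3, by omega⟩) ?_ ?_
    · intro s'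
      unfold pvCell
      by_cases hg : s'.2.2 < pvRl al bl alo blo i0 j0
      · rw [if_pos hg]
      · rw [if_neg hg]
        exact Nat.le_of_not_lt hg
    · intro s' j' _
      exact hmono i0 s' j'
  · intro s i _
    exact pvFoldl_mono _ (fun b => b.2.2) _ _ (fun s' j _ => hmono i s' j)

theorem pvExtendLeft_noop (al bl : List String) (alo blo : Nat) (best : Nat × Nat × Nat)
    (hQ : pvQ al bl alo blo best) : pvExtendLeft al bl alo blo best = best := by
  obtain ⟨bi, bj, k⟩ := best
  rw [pvExtendLeft.eq_def]
  apply dif_neg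
  rintro ⟨h1, h2, h3⟩
  rcases hQ with hQ | ⟨ie, je, hie, hje, hpos, hrl, hb1, hb2⟩
  · have : bi = alo := by
      have := congrArg Prod.fst hQ
      simpa using this
    omega
  · simp only at hpos hrl hb1 hb2
    have hle := pvRl_le al bl alo blo ie je
    refine pvRl_start al bl alo blo ie je (hrl ▸ hpos) ?_
    rw [← hrl]
    refine ⟨by omega, by omega, ?_⟩
    have e1 : ie - k = bi - 1 := by omega
    have e2 : je - k = bj - 1 := by omega
    rw [e1, e2]
    exact h3

theorem pvExtendRight_noop (al bl : List String) (alo ahi blo bhi : Nat)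
    (best : Nat × Nat × Nat) (hQ : pvQ al bl alo blo best)
    (hbound : ∀ i0 j0, alo ≤ i0 → i0 < ahi → blo ≤ j0 → j0 < bhi →
      pvRl al bl alo blo i0 j0 ≤ best.2.2) :
    pvExtendRight al bl ahi bhi best = best := by
  obtain ⟨bi, bj, k⟩ := best
  rw [pvExtendRight.eq_def]
  apply dif_neg
  rintro ⟨h1, h2, h3⟩
  rcases hQ with hQ | ⟨ie, je, hie, hje, hpos, hrl, hb1, hb2⟩
  · have e1 : bi = alo := by have := congrArg Prod.fst hQ; simpa using this
    have e2 : bj = blo := by have := congrArg (fun p => p.2.1) hQ; simpa using this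
    have e3 : k = 0 := by have := congrArg (fun p => p.2.2) hQ; simpa using this
    rw [e1, e3] at h1
    rw [e2, e3] at h2
    rw [e1, e2, e3] at h3
    simp only [Nat.add_zero] at h1 h2 h3
    have hpos := pvRl_matchpos al bl alo blo alo blo h3
    have hb := hbound alo blo le_rfl h1 le_rfl h2
    simp only at hb
    omega
  · simp only at hpos hrl hb1 hb2
    have hle := pvRl_le al bl alo blo ie je
    have ebi : bi + k = ie + 1 := by omega
    have ebj : bj + k = je + 1 := by omega
    rw [ebi] at h1
    rw [ebj] at h2
    rw [ebi, ebj] at h3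
    have hrl' : pvRl al bl alo blo (ie + 1) (je + 1) = pvRl al bl alo blo ie je + 1 := by
      rw [pvRl_succ al bl alo blo (ie + 1) (je + 1) h3 (by omega) (by omega)]
      simp
    have hb := hbound (ie + 1) (je + 1) (by omega) h1 (by omega) h2
    simp only at hb
    omega

-- THE matcher equivalence: the row DP equals difflib's find_longest_match (extensions and all)
theorem pvBestMatch_eq (al bl : List String) (alo ahi blo bhi : Nat) (hlen : bhi ≤ bl.length) :
    pvBestMatch al bl alo ahi blo bhi =
      pvFindLongestMatch al bl (pvB2j bl 0 PySem.Dict.empty) alo ahi blo bhi := by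
  have hb : ∀ s, (pvB2j bl 0 PySem.Dict.empty).getD s [] =
      (List.range' 0 bl.length).filter (fun j => decide (bl.getD j "" = s)) := by
    intro s
    rw [pvB2j_getD]
    simp
  have hdinit : ∀ j, (PySem.Dict.empty : PySem.Dict Nat Nat).getD j 0 =
      if blo ≤ j ∧ j < bhi ∧ alo < alo then pvRl al bl alo blo (alo - 1) j else 0 := by
    intro j
    simp
  have hspecA := pvFlmOuter_spec al bl (pvB2j bl 0 PySem.Dict.empty) hb alo blo bhi hlen
    (ahi - alo) alo PySem.Dict.empty (alo, blo, 0) le_rfl hdinit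
  have hpinit : ∀ t, (List.replicate (bhi - blo) (0 : Nat)).getD t 0 =
      if t < bhi - blo ∧ alo < alo then pvRl al bl alo blo (alo - 1) (blo + t) else 0 := by
    intro t
    by_cases h : t < bhi - blo <;> simp [List.getD, h]
  have hspecB := pvRowOuter_spec al bl alo blo bhi (ahi - alo) alo
    (List.replicate (bhi - blo) 0) (alo, blo, 0) le_rfl hpinit
  have hQ : pvQ al bl alo blo (pvSpecBest al bl alo ahi blo bhi) := pvSpec_Q al bl alo ahi blo bhi
  unfold pvBestMatch pvFindLongestMatch
  rw [hspecB, hspecA]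
  show pvSpecBest al bl alo ahi blo bhi =
    pvExtendRight al bl ahi bhi (pvExtendLeft al bl alo blo (pvSpecBest al bl alo ahi blo bhi))
  rw [pvExtendLeft_noop al bl alo blo _ hQ,
    pvExtendRight_noop al bl alo ahi blo bhi _ hQ (pvSpec_bound al bl alo ahi blo bhi)]

-- ==== part 2: bounds of a find_longest_match result within its region ====
def pvPB (alo ahi blo bhi : Nat) (x : Nat × Nat × Nat) : Prop :=
  alo ≤ x.1 ∧ blo ≤ x.2.1 ∧ x.1 + x.2.2 ≤ ahi ∧ x.2.1 + x.2.2 ≤ bhi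

-- invariant of the j2len dicts: value at key j is at most m and at most j + 1 - blo
def pvDInv (blo m : Nat) (d : PySem.Dict Nat Nat) : Prop :=
  ∀ j, d.getD j 0 ≤ m ∧ d.getD j 0 ≤ j + 1 - blo

theorem pvFlmInner_inv (alo ahi blo bhi i : Nat) (j2len : PySem.Dict Nat Nat)
    (hia : alo ≤ i) (hi : i < ahi) (hd : pvDInv blo (i - alo) j2len) :
    ∀ (js : List Nat) (new : PySem.Dict Nat Nat) (best : Nat × Nat × Nat),
      pvDInv blo (i + 1 - alo) new → pvPB alo ahi blo bhi best →
      pvDInv blo (i + 1 - alo) (pvFlmInner blo bhi i j2len js new best).1 ∧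
      pvPB alo ahi blo bhi (pvFlmInner blo bhi i j2len js new best).2 := by
  intro js
  induction js with
  | nil => intro new best hn hb; simp only [pvFlmInner]; exact ⟨hn, hb⟩
  | cons j rest ih =>
    intro new best hn hb
    simp only [pvFlmInner]
    by_cases h1 : j < blo
    · simp only [if_pos h1]; exact ih new best hn hb
    · simp only [if_neg h1]
      by_cases h2 : bhi ≤ j
      · simp only [if_pos h2]; exact ⟨hn, hb⟩
      · simp only [if_neg h2]
        have hblo : blo ≤ j := Nat.le_of_not_lt h1
        have hjb : j < bhi := Nat.lt_of_not_le h2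
        set v := (if j = 0 then 0 else j2len.getD (j - 1) 0) with hv
        have hv1 : v ≤ i - alo := by
          rw [hv]; by_cases hj0 : j = 0
          · simp [hj0]
          · simpa [hj0] using (hd (j - 1)).1
        have hv2 : v + 1 ≤ j + 1 - blo := by
          rw [hv]; by_cases hj0 : j = 0
          · simp only [if_pos hj0]; omega
          · have := (hd (j - 1)).2
            simp only [if_neg hj0]
            omega
        obtain ⟨hb1, hb2, hb3, hb4⟩ := hb
        apply ih
        · intro j'
          rw [PySem.Dict.getD_insert]
          split
          · exact ⟨by omega, by omega⟩
          · exact hn j'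
        · split
          · refine ⟨?_, ?_, ?_, ?_⟩ <;> simp <;> omega
          · exact ⟨hb1, hb2, hb3, hb4⟩

theorem pvFlmOuter_inv (al : List String) (b2j : PySem.Dict String (List Nat))
    (alo ahi blo bhi : Nat) :
    ∀ (n i : Nat) (d : PySem.Dict Nat Nat) (best : Nat × Nat × Nat),
      alo ≤ i → i + n ≤ ahi → pvDInv blo (i - alo) d → pvPB alo ahi blo bhi best →
      pvPB alo ahi blo bhi (pvFlmOuter al b2j blo bhi (List.range' i n) d best) := by
  intro n
  induction n with
  | zero => intro i d best _ _ _ hb; simpa [pvFlmOuter] using hb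
  | succ n ihn =>
    intro i d best hia hn hd hb
    rw [List.range'_succ]
    simp only [pvFlmOuter]
    have hinner := pvFlmInner_inv alo ahi blo bhi i d hia (by omega) hd
      (b2j.getD (al.getD i "") []) PySem.Dict.empty best
      (fun j => by simp [PySem.Dict.getD_empty]) hb
    refine ihn (i + 1) _ _ (by omega) (by omega) ?_ ?_
    · have := hinner.1; simpa using this
    · exact hinner.2

theorem pvExtendLeft_inv (al bl : List String) (alo ahi blo bhi : Nat)
    (best : Nat × Nat × Nat) (h : pvPB alo ahi blo bhi best) :
    pvPB alo ahi blo bhi (pvExtendLeft al bl alo blo best) := by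
  revert h
  fun_induction pvExtendLeft al bl alo blo best with
  | case1 besti bestj bestsize hg ih =>
    intro hpb
    apply ih
    obtain ⟨hpb1, hpb2, hpb3, hpb4⟩ := hpb
    simp only [Prod.fst, Prod.snd] at hpb1 hpb2 hpb3 hpb4
    refine ⟨?_, ?_, ?_, ?_⟩ <;> simp only [Prod.fst, Prod.snd] <;> omega
  | case2 besti bestj bestsize hg => intro hpb; exact hpb

theorem pvExtendRight_inv (al bl : List String) (alo ahi blo bhi : Nat)
    (best : Nat × Nat × Nat) (h : pvPB alo ahi blo bhi best) :
    pvPB alo ahi blo bhi (pvExtendRight al bl ahi bhi best) := by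
  revert h
  fun_induction pvExtendRight al bl ahi bhi best with
  | case1 besti bestj bestsize hg ih =>
    intro hpb
    apply ih
    obtain ⟨hpb1, hpb2, hpb3, hpb4⟩ := hpb
    simp only [Prod.fst, Prod.snd] at hpb1 hpb2 hpb3 hpb4
    refine ⟨?_, ?_, ?_, ?_⟩ <;> simp only [Prod.fst, Prod.snd] <;> omega
  | case2 besti bestj bestsize hg => intro hpb; exact hpb

theorem pvFlm_bounds (al bl : List String) (b2j : PySem.Dict String (List Nat))
    (alo ahi blo bhi : Nat) (h1 : alo ≤ ahi) (h2 : blo ≤ bhi) :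
    pvPB alo ahi blo bhi (pvFindLongestMatch al bl b2j alo ahi blo bhi) := by
  unfold pvFindLongestMatch
  apply pvExtendRight_inv
  apply pvExtendLeft_inv
  exact pvFlmOuter_inv al b2j alo ahi blo bhi (ahi - alo) alo PySem.Dict.empty (alo, blo, 0)
    le_rfl (by omega) (fun j => by simp [PySem.Dict.getD_empty])
    ⟨le_rfl, le_rfl, by simpa using h1, by simpa using h2⟩

theorem pvFlmInner_stall (blo bhi i : Nat) (j2len : PySem.Dict Nat Nat) (h : bhi ≤ blo) :
    ∀ (js : List Nat) (new : PySem.Dict Nat Nat) (best : Nat × Nat × Nat),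
      pvFlmInner blo bhi i j2len js new best = (new, best) := by
  intro js
  induction js with
  | nil => intro new best; simp [pvFlmInner]
  | cons j rest ih =>
    intro new best
    simp only [pvFlmInner]
    by_cases h1 : j < blo
    · simp only [if_pos h1]; exact ih new best
    · simp only [if_neg h1, if_pos (by omega : bhi ≤ j)]

theorem pvFlmOuter_stall (al : List String) (b2j : PySem.Dict String (List Nat))
    (blo bhi : Nat) (h : bhi ≤ blo) :
    ∀ (is : List Nat) (d : PySem.Dict Nat Nat) (best : Nat × Nat × Nat),
      pvFlmOuter al b2j blo bhi is d best = best := by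
  intro is
  induction is with
  | nil => intro d best; simp [pvFlmOuter]
  | cons i rest ih =>
    intro d best
    simp only [pvFlmOuter]
    rw [pvFlmInner_stall blo bhi i d h]
    exact ih _ _

theorem pvFlm_empty (al bl : List String) (b2j : PySem.Dict String (List Nat))
    (alo ahi blo bhi : Nat) (h : ahi ≤ alo ∨ bhi ≤ blo) :
    pvFindLongestMatch al bl b2j alo ahi blo bhi = (alo, blo, 0) := by
  unfold pvFindLongestMatch
  have hbest : pvFlmOuter al b2j blo bhi (List.range' alo (ahi - alo)) PySem.Dict.empty
      (alo, blo, 0) = (alo, blo, 0) := by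
    rcases h with h | h
    · rw [Nat.sub_eq_zero_of_le h]
      simp [pvFlmOuter]
    · exact pvFlmOuter_stall al b2j blo bhi h _ _ _
  rw [hbest]
  show pvExtendRight al bl ahi bhi (pvExtendLeft al bl alo blo (alo, blo, 0)) = (alo, blo, 0)
  have hL : pvExtendLeft al bl alo blo (alo, blo, 0) = (alo, blo, 0) := by
    rw [pvExtendLeft.eq_def]
    exact dif_neg (by rintro ⟨h1, -⟩; omega)
  have hR : pvExtendRight al bl ahi bhi (alo, blo, 0) = (alo, blo, 0) := by
    rw [pvExtendRight.eq_def]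
    exact dif_neg (by rintro ⟨h1, h2, -⟩; omega)
  rw [hL, hR]

-- ==== part 3: both pipelines produce the in-order gaps of the match recursion ====

-- in-order list of the matching blocks of a region (proof-side; the guard only justifies
-- termination and is always true where the lemmas use it)
def pvIno (al bl : List String) (b2j : PySem.Dict String (List Nat)) (alo ahi blo bhi : Nat) :
    List (Nat × Nat × Nat) :=
  if (pvFindLongestMatch al bl b2j alo ahi blo bhi).2.2 ≠ 0 then
    if h : ((pvFindLongestMatch al bl b2j alo ahi blo bhi).1 - alo) + ((pvFindLongestMatch al bl b2j alo ahi blo bhi).2.1 - blo) < (ahi - alo) + (bhi - blo) ∧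
        (ahi - ((pvFindLongestMatch al bl b2j alo ahi blo bhi).1 + (pvFindLongestMatch al bl b2j alo ahi blo bhi).2.2)) + (bhi - ((pvFindLongestMatch al bl b2j alo ahi blo bhi).2.1 + (pvFindLongestMatch al bl b2j alo ahi blo bhi).2.2)) < (ahi - alo) + (bhi - blo) then
      pvIno al bl b2j alo (pvFindLongestMatch al bl b2j alo ahi blo bhi).1 blo (pvFindLongestMatch al bl b2j alo ahi blo bhi).2.1 ++ (pvFindLongestMatch al bl b2j alo ahi blo bhi) ::
        pvIno al bl b2j ((pvFindLongestMatch al bl b2j alo ahi blo bhi).1 + (pvFindLongestMatch al bl b2j alo ahi blo bhi).2.2) ahi ((pvFindLongestMatch al bl b2j alo ahi blo bhi).2.1 + (pvFindLongestMatch al bl b2j alo ahi blo bhi).2.2) bhi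
    else [(pvFindLongestMatch al bl b2j alo ahi blo bhi)]
  else []
  termination_by (ahi - alo) + (bhi - blo)
  decreasing_by
  · omega
  · omega

-- blocks of a region in the order the queue loop of A produces them
def pvRawOf (al bl : List String) (b2j : PySem.Dict String (List Nat)) (alo ahi blo bhi : Nat) :
    List (Nat × Nat × Nat) :=
  if (pvFindLongestMatch al bl b2j alo ahi blo bhi).2.2 ≠ 0 then
    if h : ((pvFindLongestMatch al bl b2j alo ahi blo bhi).1 - alo) + ((pvFindLongestMatch al bl b2j alo ahi blo bhi).2.1 - blo) < (ahi - alo) + (bhi - blo) ∧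
        (ahi - ((pvFindLongestMatch al bl b2j alo ahi blo bhi).1 + (pvFindLongestMatch al bl b2j alo ahi blo bhi).2.2)) + (bhi - ((pvFindLongestMatch al bl b2j alo ahi blo bhi).2.1 + (pvFindLongestMatch al bl b2j alo ahi blo bhi).2.2)) < (ahi - alo) + (bhi - blo) then
      (pvFindLongestMatch al bl b2j alo ahi blo bhi) :: ((if (pvFindLongestMatch al bl b2j alo ahi blo bhi).1 + (pvFindLongestMatch al bl b2j alo ahi blo bhi).2.2 < ahi ∧ (pvFindLongestMatch al bl b2j alo ahi blo bhi).2.1 + (pvFindLongestMatch al bl b2j alo ahi blo bhi).2.2 < bhi then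
          pvRawOf al bl b2j ((pvFindLongestMatch al bl b2j alo ahi blo bhi).1 + (pvFindLongestMatch al bl b2j alo ahi blo bhi).2.2) ahi ((pvFindLongestMatch al bl b2j alo ahi blo bhi).2.1 + (pvFindLongestMatch al bl b2j alo ahi blo bhi).2.2) bhi else []) ++
        (if alo < (pvFindLongestMatch al bl b2j alo ahi blo bhi).1 ∧ blo < (pvFindLongestMatch al bl b2j alo ahi blo bhi).2.1 then pvRawOf al bl b2j alo (pvFindLongestMatch al bl b2j alo ahi blo bhi).1 blo (pvFindLongestMatch al bl b2j alo ahi blo bhi).2.1 else []))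
    else [(pvFindLongestMatch al bl b2j alo ahi blo bhi)]
  else []
  termination_by (ahi - alo) + (bhi - blo)
  decreasing_by
  · omega
  · omega

-- gaps of a region in order (what B's worklist loop emits for it)
def pvGt (al bl : List String) (b2j : PySem.Dict String (List Nat)) (alo ahi blo bhi : Nat) :
    List (Int × Int × Int × Int) :=
  if (pvFindLongestMatch al bl b2j alo ahi blo bhi).2.2 ≠ 0 then
    if h : ((pvFindLongestMatch al bl b2j alo ahi blo bhi).1 - alo) + ((pvFindLongestMatch al bl b2j alo ahi blo bhi).2.1 - blo) < (ahi - alo) + (bhi - blo) ∧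
        (ahi - ((pvFindLongestMatch al bl b2j alo ahi blo bhi).1 + (pvFindLongestMatch al bl b2j alo ahi blo bhi).2.2)) + (bhi - ((pvFindLongestMatch al bl b2j alo ahi blo bhi).2.1 + (pvFindLongestMatch al bl b2j alo ahi blo bhi).2.2)) < (ahi - alo) + (bhi - blo) then
      pvGt al bl b2j alo (pvFindLongestMatch al bl b2j alo ahi blo bhi).1 blo (pvFindLongestMatch al bl b2j alo ahi blo bhi).2.1 ++
        pvGt al bl b2j ((pvFindLongestMatch al bl b2j alo ahi blo bhi).1 + (pvFindLongestMatch al bl b2j alo ahi blo bhi).2.2) ahi ((pvFindLongestMatch al bl b2j alo ahi blo bhi).2.1 + (pvFindLongestMatch al bl b2j alo ahi blo bhi).2.2) bhi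
    else []
  else if alo < ahi ∨ blo < bhi then [((alo : Int), (ahi : Int), (blo : Int), (bhi : Int))] else []
  termination_by (ahi - alo) + (bhi - blo)
  decreasing_by
  · omega
  · omega

-- the gap scan, on Nat blocks (A's loop after the break/dummy bookkeeping is peeled off)
def pvGaps0 : Nat → Nat → List (Nat × Nat × Nat) → List (Int × Int × Int × Int)
  | _, _, [] => []
  | li, ri, (a, b, k) :: rest =>
    (if li < a ∨ ri < b then [((li : Int), (a : Int), (ri : Int), (b : Int))] else []) ++
      pvGaps0 (a + k) (b + k) rest

-- fuel costs of a stack of regions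
def pvCost (st : List (Nat × Nat × Nat × Nat)) : Nat :=
  (st.map (fun r => 2 * ((r.2.1 - r.1) + (r.2.2.2 - r.2.2.1)) + 1)).sum

def pvValidSt (st : List (Nat × Nat × Nat × Nat)) : Prop :=
  ∀ r ∈ st, r.1 ≤ r.2.1 ∧ r.2.2.1 ≤ r.2.2.2

-- validity with the right edge inside b (needed to replace the row DP by find_longest_match)
def pvValidStB (L : Nat) (st : List (Nat × Nat × Nat × Nat)) : Prop :=
  ∀ r ∈ st, r.1 ≤ r.2.1 ∧ r.2.2.1 ≤ r.2.2.2 ∧ r.2.2.2 ≤ L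

theorem pvIno_empty (al bl : List String) (b2j : PySem.Dict String (List Nat))
    (alo ahi blo bhi : Nat) (h : ahi ≤ alo ∨ bhi ≤ blo) :
    pvIno al bl b2j alo ahi blo bhi = [] := by
  rw [pvIno, pvFlm_empty al bl b2j alo ahi blo bhi h]
  simp

theorem pvIno_node (al bl : List String) (b2j : PySem.Dict String (List Nat))
    (alo ahi blo bhi : Nat) (h1 : alo ≤ ahi) (h2 : blo ≤ bhi) (hk : (pvFindLongestMatch al bl b2j alo ahi blo bhi).2.2 ≠ 0) :
    pvIno al bl b2j alo ahi blo bhi =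
      pvIno al bl b2j alo (pvFindLongestMatch al bl b2j alo ahi blo bhi).1 blo (pvFindLongestMatch al bl b2j alo ahi blo bhi).2.1 ++ (pvFindLongestMatch al bl b2j alo ahi blo bhi) ::
        pvIno al bl b2j ((pvFindLongestMatch al bl b2j alo ahi blo bhi).1 + (pvFindLongestMatch al bl b2j alo ahi blo bhi).2.2) ahi ((pvFindLongestMatch al bl b2j alo ahi blo bhi).2.1 + (pvFindLongestMatch al bl b2j alo ahi blo bhi).2.2) bhi := by
  obtain ⟨hp1, hp2, hp3, hp4⟩ := pvFlm_bounds al bl b2j alo ahi blo bhi h1 h2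
  rw [pvIno, if_pos hk, dif_pos ⟨by omega, by omega⟩]

theorem pvRawOf_node (al bl : List String) (b2j : PySem.Dict String (List Nat))
    (alo ahi blo bhi : Nat) (h1 : alo ≤ ahi) (h2 : blo ≤ bhi) (hk : (pvFindLongestMatch al bl b2j alo ahi blo bhi).2.2 ≠ 0) :
    pvRawOf al bl b2j alo ahi blo bhi =
      (pvFindLongestMatch al bl b2j alo ahi blo bhi) :: ((if (pvFindLongestMatch al bl b2j alo ahi blo bhi).1 + (pvFindLongestMatch al bl b2j alo ahi blo bhi).2.2 < ahi ∧ (pvFindLongestMatch al bl b2j alo ahi blo bhi).2.1 + (pvFindLongestMatch al bl b2j alo ahi blo bhi).2.2 < bhi then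
          pvRawOf al bl b2j ((pvFindLongestMatch al bl b2j alo ahi blo bhi).1 + (pvFindLongestMatch al bl b2j alo ahi blo bhi).2.2) ahi ((pvFindLongestMatch al bl b2j alo ahi blo bhi).2.1 + (pvFindLongestMatch al bl b2j alo ahi blo bhi).2.2) bhi else []) ++
        (if alo < (pvFindLongestMatch al bl b2j alo ahi blo bhi).1 ∧ blo < (pvFindLongestMatch al bl b2j alo ahi blo bhi).2.1 then pvRawOf al bl b2j alo (pvFindLongestMatch al bl b2j alo ahi blo bhi).1 blo (pvFindLongestMatch al bl b2j alo ahi blo bhi).2.1 else [])) := by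
  obtain ⟨hp1, hp2, hp3, hp4⟩ := pvFlm_bounds al bl b2j alo ahi blo bhi h1 h2
  rw [pvRawOf, if_pos hk, dif_pos ⟨by omega, by omega⟩]

theorem pvRawOf_leaf (al bl : List String) (b2j : PySem.Dict String (List Nat))
    (alo ahi blo bhi : Nat) (hk : ¬ (pvFindLongestMatch al bl b2j alo ahi blo bhi).2.2 ≠ 0) :
    pvRawOf al bl b2j alo ahi blo bhi = [] := by
  rw [pvRawOf, if_neg hk]

theorem pvGt_node (al bl : List String) (b2j : PySem.Dict String (List Nat))
    (alo ahi blo bhi : Nat) (h1 : alo ≤ ahi) (h2 : blo ≤ bhi) (hk : (pvFindLongestMatch al bl b2j alo ahi blo bhi).2.2 ≠ 0) :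
    pvGt al bl b2j alo ahi blo bhi =
      pvGt al bl b2j alo (pvFindLongestMatch al bl b2j alo ahi blo bhi).1 blo (pvFindLongestMatch al bl b2j alo ahi blo bhi).2.1 ++
        pvGt al bl b2j ((pvFindLongestMatch al bl b2j alo ahi blo bhi).1 + (pvFindLongestMatch al bl b2j alo ahi blo bhi).2.2) ahi ((pvFindLongestMatch al bl b2j alo ahi blo bhi).2.1 + (pvFindLongestMatch al bl b2j alo ahi blo bhi).2.2) bhi := by
  obtain ⟨hp1, hp2, hp3, hp4⟩ := pvFlm_bounds al bl b2j alo ahi blo bhi h1 h2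
  rw [pvGt, if_pos hk, dif_pos ⟨by omega, by omega⟩]

theorem pvGt_leaf (al bl : List String) (b2j : PySem.Dict String (List Nat))
    (alo ahi blo bhi : Nat) (hk : ¬ (pvFindLongestMatch al bl b2j alo ahi blo bhi).2.2 ≠ 0) :
    pvGt al bl b2j alo ahi blo bhi =
      if alo < ahi ∨ blo < bhi then [((alo : Int), (ahi : Int), (blo : Int), (bhi : Int))]
      else [] := by
  rw [pvGt, if_neg hk]

theorem pvCost_cons (a b c d : Nat) (st : List (Nat × Nat × Nat × Nat)) :
    pvCost ((a, b, c, d) :: st) = 2 * ((b - a) + (d - c)) + 1 + pvCost st := by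
  simp [pvCost]

theorem pvValid_cons (a b c d : Nat) (st : List (Nat × Nat × Nat × Nat))
    (h1 : a ≤ b) (h2 : c ≤ d) (ht : pvValidSt st) : pvValidSt ((a, b, c, d) :: st) := by
  intro r hr
  rcases List.mem_cons.mp hr with hr | hr
  · subst hr; exact ⟨h1, h2⟩
  · exact ht r hr

theorem pvValidB_cons (L a b c d : Nat) (st : List (Nat × Nat × Nat × Nat))
    (h1 : a ≤ b) (h2 : c ≤ d) (h3 : d ≤ L) (ht : pvValidStB L st) :
    pvValidStB L ((a, b, c, d) :: st) := by
  intro r hr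
  rcases List.mem_cons.mp hr with hr | hr
  · subst hr; exact ⟨h1, h2, h3⟩
  · exact ht r hr

theorem pvQloop_eq (al bl : List String) (b2j : PySem.Dict String (List Nat)) :
    ∀ (fuel : Nat) (st : List (Nat × Nat × Nat × Nat)) (acc : List (Nat × Nat × Nat)),
      pvValidSt st → pvCost st ≤ fuel →
      pvQloop al bl b2j fuel st acc =
        acc ++ (st.map (fun r => pvRawOf al bl b2j r.1 r.2.1 r.2.2.1 r.2.2.2)).flatten := by
  intro fuel
  induction fuel with
  | zero =>
    intro st acc hv hc
    cases st with
    | nil => simp [pvQloop]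
    | cons r st' =>
      obtain ⟨alo, ahi, blo, bhi⟩ := r
      rw [pvCost_cons] at hc
      omega
  | succ fuel ih =>
    intro st acc hv hc
    cases st with
    | nil => simp [pvQloop]
    | cons r st' =>
      obtain ⟨alo, ahi, blo, bhi⟩ := r
      have hval := hv _ (List.mem_cons_self ..)
      obtain ⟨hv1, hv2⟩ := hval
      obtain ⟨hp1, hp2, hp3, hp4⟩ := pvFlm_bounds al bl b2j alo ahi blo bhi hv1 hv2
      rw [pvCost_cons] at hc
      have hvt : pvValidSt st' := fun r hr => hv r (List.mem_cons_of_mem _ hr)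
      simp only [pvQloop, List.map_cons, List.flatten_cons]
      by_cases hk : (pvFindLongestMatch al bl b2j alo ahi blo bhi).2.2 ≠ 0
      · have hknz : 1 ≤ (pvFindLongestMatch al bl b2j alo ahi blo bhi).2.2 := Nat.one_le_iff_ne_zero.mpr hk
        rw [pvRawOf_node al bl b2j alo ahi blo bhi hv1 hv2 hk]
        simp only [if_pos hk]
        by_cases hR : (pvFindLongestMatch al bl b2j alo ahi blo bhi).1 + (pvFindLongestMatch al bl b2j alo ahi blo bhi).2.2 < ahi ∧ (pvFindLongestMatch al bl b2j alo ahi blo bhi).2.1 + (pvFindLongestMatch al bl b2j alo ahi blo bhi).2.2 < bhi <;>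
          by_cases hL : alo < (pvFindLongestMatch al bl b2j alo ahi blo bhi).1 ∧ blo < (pvFindLongestMatch al bl b2j alo ahi blo bhi).2.1
        · simp only [if_pos hR, if_pos hL]
          rw [ih _ _ (pvValid_cons _ _ _ _ _ (by omega) (by omega)
              (pvValid_cons _ _ _ _ _ (by omega) (by omega) hvt))
            (by rw [pvCost_cons, pvCost_cons]; omega)]
          simp [List.append_assoc]
        · simp only [if_pos hR, if_neg hL]
          rw [ih _ _ (pvValid_cons _ _ _ _ _ (by omega) (by omega) hvt)
            (by rw [pvCost_cons]; omega)]
          simp [List.append_assoc]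
        · simp only [if_neg hR, if_pos hL]
          rw [ih _ _ (pvValid_cons _ _ _ _ _ (by omega) (by omega) hvt)
            (by rw [pvCost_cons]; omega)]
          simp [List.append_assoc]
        · simp only [if_neg hR, if_neg hL]
          rw [ih _ _ hvt (by omega)]
          simp [List.append_assoc]
      · simp only [if_neg hk]
        rw [pvRawOf_leaf al bl b2j alo ahi blo bhi hk]
        rw [ih _ _ hvt (by omega)]
        simp

-- B's worklist loop computes the in-order gaps of every pending region
theorem pvBwork_eq (al bl : List String) :
    ∀ (fuel : Nat) (st : List (Nat × Nat × Nat × Nat)) (gaps : List (Int × Int × Int × Int)),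
      pvValidStB bl.length st → pvCost st ≤ fuel →
      pvBwork al bl fuel st gaps =
        gaps ++ (st.map (fun r =>
          pvGt al bl (pvB2j bl 0 PySem.Dict.empty) r.1 r.2.1 r.2.2.1 r.2.2.2)).flatten := by
  intro fuel
  induction fuel with
  | zero =>
    intro st gaps hv hc
    cases st with
    | nil => simp [pvBwork]
    | cons r st' =>
      obtain ⟨alo, ahi, blo, bhi⟩ := r
      rw [pvCost_cons] at hc
      omega
  | succ fuel ih =>
    intro st gaps hv hc
    cases st with
    | nil => simp [pvBwork]
    | cons r st' =>
      obtain ⟨alo, ahi, blo, bhi⟩ := r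
      have hval := hv _ (List.mem_cons_self ..)
      obtain ⟨hv1', hv2', hv3'⟩ := hval
      have hv1 : alo ≤ ahi := hv1'
      have hv2 : blo ≤ bhi := hv2'
      have hv3 : bhi ≤ bl.length := hv3'
      obtain ⟨hp1, hp2, hp3, hp4⟩ := pvFlm_bounds al bl (pvB2j bl 0 PySem.Dict.empty) alo ahi blo bhi hv1 hv2
      rw [pvCost_cons] at hc
      have hvt : pvValidStB bl.length st' := fun r hr => hv r (List.mem_cons_of_mem _ hr)
      simp only [pvBwork, List.map_cons, List.flatten_cons]
      rw [pvBestMatch_eq al bl alo ahi blo bhi hv3]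
      by_cases hk : (pvFindLongestMatch al bl (pvB2j bl 0 PySem.Dict.empty) alo ahi blo bhi).2.2 ≠ 0
      · have hknz : 1 ≤ (pvFindLongestMatch al bl (pvB2j bl 0 PySem.Dict.empty) alo ahi blo bhi).2.2 := Nat.one_le_iff_ne_zero.mpr hk
        rw [pvGt_node al bl (pvB2j bl 0 PySem.Dict.empty) alo ahi blo bhi hv1 hv2 hk]
        simp only [if_pos hk]
        rw [ih _ _ (pvValidB_cons _ _ _ _ _ _ (by omega) (by omega) (by omega)
            (pvValidB_cons _ _ _ _ _ _ (by omega) (by omega) (by omega) hvt))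
          (by rw [pvCost_cons, pvCost_cons]; omega)]
        simp [List.append_assoc]
      · simp only [if_neg hk]
        rw [pvGt_leaf al bl (pvB2j bl 0 PySem.Dict.empty) alo ahi blo bhi hk]
        by_cases hg : alo < ahi ∨ blo < bhi
        · simp only [if_pos hg]
          rw [ih _ _ hvt (by omega)]
          simp [List.append_assoc]
        · simp only [if_neg hg]
          rw [ih _ _ hvt (by omega)]
          simp

theorem pvIno_mem (al bl : List String) (b2j : PySem.Dict String (List Nat)) :
    ∀ (n alo ahi blo bhi : Nat), (ahi - alo) + (bhi - blo) ≤ n → alo ≤ ahi → blo ≤ bhi →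
      ∀ y ∈ pvIno al bl b2j alo ahi blo bhi, alo ≤ y.1 ∧ y.1 + y.2.2 ≤ ahi ∧ y.2.2 ≠ 0 := by
  intro n
  induction n with
  | zero =>
    intro alo ahi blo bhi hn h1 h2 y hy
    rw [pvIno_empty al bl b2j alo ahi blo bhi (Or.inl (by omega))] at hy
    simp at hy
  | succ n ihn =>
    intro alo ahi blo bhi hn h1 h2 y hy
    by_cases hk : (pvFindLongestMatch al bl b2j alo ahi blo bhi).2.2 ≠ 0
    · obtain ⟨hp1, hp2, hp3, hp4⟩ := pvFlm_bounds al bl b2j alo ahi blo bhi h1 h2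
      rw [pvIno_node al bl b2j alo ahi blo bhi h1 h2 hk] at hy
      rcases List.mem_append.mp hy with hy | hy
      · have hr := ihn alo _ blo _ (by omega) hp1 hp2 y hy
        exact ⟨hr.1, by omega, hr.2.2⟩
      · rcases List.mem_cons.mp hy with hy | hy
        · subst hy; exact ⟨hp1, hp3, hk⟩
        · have hr := ihn _ ahi _ bhi (by omega) hp3 hp4 y hy
          exact ⟨by omega, hr.2.1, hr.2.2⟩
    · rw [pvIno, if_neg hk] at hy
      simp at hy

theorem pvIno_pairwise (al bl : List String) (b2j : PySem.Dict String (List Nat)) :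
    ∀ (n alo ahi blo bhi : Nat), (ahi - alo) + (bhi - blo) ≤ n → alo ≤ ahi → blo ≤ bhi →
      (pvIno al bl b2j alo ahi blo bhi).Pairwise (fun u v => u.1 < v.1) := by
  intro n
  induction n with
  | zero =>
    intro alo ahi blo bhi hn h1 h2
    rw [pvIno_empty al bl b2j alo ahi blo bhi (Or.inl (by omega))]
    exact List.Pairwise.nil
  | succ n ihn =>
    intro alo ahi blo bhi hn h1 h2
    by_cases hk : (pvFindLongestMatch al bl b2j alo ahi blo bhi).2.2 ≠ 0
    · obtain ⟨hp1, hp2, hp3, hp4⟩ := pvFlm_bounds al bl b2j alo ahi blo bhi h1 h2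
      rw [pvIno_node al bl b2j alo ahi blo bhi h1 h2 hk]
      have hmemL := pvIno_mem al bl b2j n alo _ blo _ (by omega) hp1 hp2
      have hmemR := pvIno_mem al bl b2j n _ ahi _ bhi (by omega) hp3 hp4
      refine (List.pairwise_append).mpr ⟨ihn alo _ blo _ (by omega) hp1 hp2, ?_, ?_⟩
      · refine List.pairwise_cons.mpr ⟨?_, ihn _ ahi _ bhi (by omega) hp3 hp4⟩
        intro z hz
        have := hmemR z hz
        omega
      · intro y hy z hz
        have hyb := hmemL y hy
        rcases List.mem_cons.mp hz with hz | hz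
        · subst hz; omega
        · have := hmemR z hz
          omega
    · rw [pvIno, if_neg hk]
      exact List.Pairwise.nil

theorem pvRawOf_perm (al bl : List String) (b2j : PySem.Dict String (List Nat)) :
    ∀ (n alo ahi blo bhi : Nat), (ahi - alo) + (bhi - blo) ≤ n → alo ≤ ahi → blo ≤ bhi →
      (pvRawOf al bl b2j alo ahi blo bhi).Perm (pvIno al bl b2j alo ahi blo bhi) := by
  intro n
  induction n with
  | zero =>
    intro alo ahi blo bhi hn h1 h2
    have hk : ¬ (pvFindLongestMatch al bl b2j alo ahi blo bhi).2.2 ≠ 0 := by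
      rw [pvFlm_empty al bl b2j alo ahi blo bhi (Or.inl (by omega))]
      simp
    rw [pvRawOf_leaf al bl b2j alo ahi blo bhi hk,
      pvIno_empty al bl b2j alo ahi blo bhi (Or.inl (by omega))]
  | succ n ihn =>
    intro alo ahi blo bhi hn h1 h2
    by_cases hk : (pvFindLongestMatch al bl b2j alo ahi blo bhi).2.2 ≠ 0
    · obtain ⟨hp1, hp2, hp3, hp4⟩ := pvFlm_bounds al bl b2j alo ahi blo bhi h1 h2
      rw [pvRawOf_node al bl b2j alo ahi blo bhi h1 h2 hk,
        pvIno_node al bl b2j alo ahi blo bhi h1 h2 hk]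
      by_cases hR : (pvFindLongestMatch al bl b2j alo ahi blo bhi).1 +
            (pvFindLongestMatch al bl b2j alo ahi blo bhi).2.2 < ahi ∧
          (pvFindLongestMatch al bl b2j alo ahi blo bhi).2.1 +
            (pvFindLongestMatch al bl b2j alo ahi blo bhi).2.2 < bhi <;>
        by_cases hL : alo < (pvFindLongestMatch al bl b2j alo ahi blo bhi).1 ∧
          blo < (pvFindLongestMatch al bl b2j alo ahi blo bhi).2.1
      · rw [if_pos hR, if_pos hL]
        have pL := ihn alo _ blo _ (by omega) hp1 hp2
        have pR := ihn _ ahi _ bhi (by omega) hp3 hp4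
        refine ((pR.append pL).cons _).trans ?_
        exact ((List.perm_append_comm).cons _).trans List.perm_middle.symm
      · rw [if_pos hR, if_neg hL,
          pvIno_empty al bl b2j alo _ blo _ (by omega)]
        have pR := ihn _ ahi _ bhi (by omega) hp3 hp4
        simpa using (pR.append (List.Perm.refl [])).cons (pvFindLongestMatch al bl b2j alo ahi blo bhi)
      · rw [if_neg hR, if_pos hL,
          pvIno_empty al bl b2j _ ahi _ bhi (by omega)]
        have pL := ihn alo _ blo _ (by omega) hp1 hp2
        refine (((List.Perm.refl []).append pL).cons _).trans ?_
        simpa using (List.perm_middle (l₁ := pvIno al bl b2j alo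
          (pvFindLongestMatch al bl b2j alo ahi blo bhi).1 blo
          (pvFindLongestMatch al bl b2j alo ahi blo bhi).2.1) (l₂ := [])).symm
      · rw [if_neg hR, if_neg hL,
          pvIno_empty al bl b2j alo _ blo _ (by omega),
          pvIno_empty al bl b2j _ ahi _ bhi (by omega)]
        simp
    · rw [pvRawOf_leaf al bl b2j alo ahi blo bhi hk, pvIno, if_neg hk]

theorem pvInsertBy_cons {α : Type} (b : α → α → Bool) (x y : α) (ys : List α) :
    PySem.List.insertBy b x (y :: ys) =
      if b x y then x :: y :: ys else y :: PySem.List.insertBy b x ys := rfl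

theorem pvInsertBy_congr {α : Type} (b1 b2 : α → α → Bool) (x : α) :
    ∀ (ys : List α), (∀ y ∈ ys, b1 x y = b2 x y) →
      PySem.List.insertBy b1 x ys = PySem.List.insertBy b2 x ys := by
  intro ys
  induction ys with
  | nil => intro _; rfl
  | cons y ys ih =>
    intro hagree
    rw [pvInsertBy_cons, pvInsertBy_cons, hagree y (List.mem_cons_self ..)]
    split
    · rfl
    · rw [ih (fun z hz => hagree z (List.mem_cons_of_mem _ hz))]

theorem pvFoldl_insertBy_congr {α : Type} (b1 b2 : α → α → Bool) :
    ∀ (l acc : List α), (∀ a ∈ l, ∀ y, (y ∈ acc ∨ y ∈ l) → b1 a y = b2 a y) →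
      l.foldl (fun acc x => PySem.List.insertBy b1 x acc) acc =
      l.foldl (fun acc x => PySem.List.insertBy b2 x acc) acc := by
  intro l
  induction l with
  | nil => intro acc _; rfl
  | cons x l ih =>
    intro acc hagree
    simp only [List.foldl_cons]
    rw [pvInsertBy_congr b1 b2 x acc (fun y hy => hagree x (List.mem_cons_self ..) y (Or.inl hy))]
    apply ih
    intro a ha y hy
    apply hagree a (List.mem_cons_of_mem _ ha)
    rcases hy with hy | hy
    · rcases (PySem.List.mem_insertBy b2 x y acc).mp hy with hy | hy
      · exact Or.inr (hy ▸ List.mem_cons_self ..)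
      · exact Or.inl hy
    · exact Or.inr (List.mem_cons_of_mem _ hy)

theorem pvSorted2_eq_sorted (xs : List (Nat × Nat × Nat))
    (h : xs.Pairwise (fun u v => u.1 ≠ v.1)) :
    PySem.List.sorted2 xs (·.1) (·.2.1) false = PySem.List.sorted xs (·.1) false := by
  have hne : ∀ a ∈ xs, ∀ y ∈ xs, a ≠ y → a.1 ≠ y.1 := by
    intro a ha y hy hay
    exact h.forall (fun u v huv => huv.symm) ha hy hay
  simp only [PySem.List.sorted2, PySem.List.sorted]
  simp only [Bool.false_eq_true, if_neg (by simp : ¬False)]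
  apply pvFoldl_insertBy_congr
  intro a ha y hy
  rcases hy with hy | hy
  · simp at hy
  · by_cases hay : a = y
    · subst hay; simp
    · have := hne a ha y hy hay
      rcases Nat.lt_trichotomy a.1 y.1 with hlt | heq | hgt
      · simp [hlt, Nat.lt_asymm hlt]
      · exact absurd heq this
      · simp [hgt, Nat.lt_asymm hgt]

-- every block emitted by the merge loop has a non-zero size
theorem pvMergeAdj_size_ne_zero : ∀ (l : List (Nat × Nat × Nat)) (i j k : Nat),
    ∀ x ∈ pvMergeAdj i j k l, x.2.2 ≠ 0 := by
  intro l
  induction l with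
  | nil =>
    intro i j k x hx
    simp only [pvMergeAdj] at hx
    split at hx <;> simp_all
  | cons hd tl ih =>
    intro i j k x hx
    obtain ⟨i2, j2, k2⟩ := hd
    simp only [pvMergeAdj] at hx
    split at hx
    · exact ih i j (k + k2) x hx
    · rcases List.mem_append.mp hx with h | h
      · split at h <;> simp_all
      · exact ih i2 j2 k2 x h

-- A's gap loop over the line_diffs of (L ++ dummy) is the plain gap scan of (L ++ dummy)
theorem pvA_loop_gaps0 : ∀ (L : List (Nat × Nat × Nat)), (∀ x ∈ L, x.2.2 ≠ 0) →
    ∀ (lc rc li ri : Nat),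
      pvA_loop (lc : Int) (rc : Int) (li : Int) (ri : Int) (pvA_lineDiffs (L ++ [(lc, rc, 0)])) =
        pvGaps0 li ri (L ++ [(lc, rc, 0)]) := by
  intro L
  induction L with
  | nil =>
    intro _ lc rc li ri
    simp [pvA_lineDiffs, pvA_loop, pvGaps0, Nat.cast_lt]
  | cons hd tl ih =>
    intro hnz lc rc li ri
    obtain ⟨a, b, k⟩ := hd
    have hk : k ≠ 0 := hnz (a, b, k) (List.mem_cons_self ..)
    have htl := ih (fun x hx => hnz x (List.mem_cons_of_mem _ hx)) lc rc
    simp only [List.cons_append, pvA_lineDiffs, if_neg hk, pvA_loop, pvGaps0]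
    rw [show ((a : Int) + (k : Int)) = (((a + k : Nat) : Nat) : Int) by push_cast; ring,
      show ((b : Int) + (k : Int)) = (((b + k : Nat) : Nat) : Int) by push_cast; ring]
    rw [htl (a + k) (b + k)]
    simp [Nat.cast_lt]

-- merging adjacent blocks does not change the gap scan
theorem pvMerge_gaps0_ne : ∀ (S : List (Nat × Nat × Nat)), (∀ x ∈ S, x.2.2 ≠ 0) →
    ∀ (i1 j1 k1 : Nat), k1 ≠ 0 → ∀ (li ri : Nat) (T : List (Nat × Nat × Nat)),
      pvGaps0 li ri (pvMergeAdj i1 j1 k1 S ++ T) = pvGaps0 li ri ((i1, j1, k1) :: (S ++ T)) := by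
  intro S
  induction S with
  | nil =>
    intro _ i1 j1 k1 hk1 li ri T
    simp [pvMergeAdj, hk1, pvGaps0]
  | cons hd tl ih =>
    intro hnz i1 j1 k1 hk1 li ri T
    obtain ⟨i2, j2, k2⟩ := hd
    have hk2 : k2 ≠ 0 := hnz (i2, j2, k2) (List.mem_cons_self ..)
    have htl := ih (fun x hx => hnz x (List.mem_cons_of_mem _ hx))
    simp only [pvMergeAdj]
    split
    · next hc =>
      obtain ⟨hc1, hc2⟩ := hc
      rw [htl i1 j1 (k1 + k2) (by omega) li ri T]
      simp only [pvGaps0, List.cons_append, ← hc1, ← hc2]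
      simp [Nat.add_assoc]
    · simp only [if_pos hk1, List.cons_append, List.append_assoc, List.singleton_append,
        List.nil_append, pvGaps0]
      rw [htl i2 j2 k2 hk2]
      simp [pvGaps0]

theorem pvMerge_gaps0 : ∀ (S : List (Nat × Nat × Nat)), (∀ x ∈ S, x.2.2 ≠ 0) →
    ∀ (T : List (Nat × Nat × Nat)),
      pvGaps0 0 0 (pvMergeAdj 0 0 0 S ++ T) = pvGaps0 0 0 (S ++ T) := by
  intro S hnz T
  cases S with
  | nil => simp [pvMergeAdj, pvGaps0]
  | cons hd tl =>
    obtain ⟨i2, j2, k2⟩ := hd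
    have hk2 : k2 ≠ 0 := hnz (i2, j2, k2) (List.mem_cons_self ..)
    have htl : ∀ x ∈ tl, x.2.2 ≠ 0 := fun x hx => hnz x (List.mem_cons_of_mem _ hx)
    simp only [pvMergeAdj]
    split
    · next hc =>
      obtain ⟨hc1, hc2⟩ := hc
      rw [pvMerge_gaps0_ne tl htl 0 0 (0 + k2) (by omega) 0 0 T]
      simp only [pvGaps0, List.cons_append, ← hc1, ← hc2]
      simp
    · have h0 : (if (0 : Nat) ≠ 0 then [((0 : Nat), (0 : Nat), (0 : Nat))] else []) =
          ([] : List (Nat × Nat × Nat)) := by simp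
      rw [h0, List.nil_append, pvMerge_gaps0_ne tl htl i2 j2 k2 hk2 0 0 T]
      simp [pvGaps0]

-- the gap scan of the in-order blocks of a region, followed by a block starting at the region's
-- end, is exactly the in-order gaps of the region
theorem pvWalk_gaps0 (al bl : List String) (b2j : PySem.Dict String (List Nat)) :
    ∀ (n alo ahi blo bhi : Nat), (ahi - alo) + (bhi - blo) ≤ n → alo ≤ ahi → blo ≤ bhi →
      ∀ (c : Nat) (T : List (Nat × Nat × Nat)),
        pvGaps0 alo blo (pvIno al bl b2j alo ahi blo bhi ++ (ahi, bhi, c) :: T) =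
          pvGt al bl b2j alo ahi blo bhi ++ pvGaps0 (ahi + c) (bhi + c) T := by
  intro n
  induction n with
  | zero =>
    intro alo ahi blo bhi hn h1 h2 c T
    have hk : ¬ (pvFindLongestMatch al bl b2j alo ahi blo bhi).2.2 ≠ 0 := by
      rw [pvFlm_empty al bl b2j alo ahi blo bhi (Or.inl (by omega))]
      simp
    rw [pvIno_empty al bl b2j alo ahi blo bhi (Or.inl (by omega)),
      pvGt_leaf al bl b2j alo ahi blo bhi hk]
    have hno : ¬ (alo < ahi ∨ blo < bhi) := by omega
    simp [pvGaps0, hno]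
  | succ n ihn =>
    intro alo ahi blo bhi hn h1 h2 c T
    by_cases hk : (pvFindLongestMatch al bl b2j alo ahi blo bhi).2.2 ≠ 0
    · obtain ⟨hp1, hp2, hp3, hp4⟩ := pvFlm_bounds al bl b2j alo ahi blo bhi h1 h2
      rw [pvIno_node al bl b2j alo ahi blo bhi h1 h2 hk,
        pvGt_node al bl b2j alo ahi blo bhi h1 h2 hk]
      simp only [List.append_assoc, List.cons_append]
      have hIL := ihn alo _ blo _ (by omega) hp1 hp2
        (pvFindLongestMatch al bl b2j alo ahi blo bhi).2.2
        (pvIno al bl b2j ((pvFindLongestMatch al bl b2j alo ahi blo bhi).1 +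
            (pvFindLongestMatch al bl b2j alo ahi blo bhi).2.2) ahi
          ((pvFindLongestMatch al bl b2j alo ahi blo bhi).2.1 +
            (pvFindLongestMatch al bl b2j alo ahi blo bhi).2.2) bhi ++ (ahi, bhi, c) :: T)
      simp only [Prod.mk.eta] at hIL
      rw [hIL]
      rw [ihn _ ahi _ bhi (by omega) hp3 hp4 c T]
    · rw [pvIno, if_neg hk, pvGt_leaf al bl b2j alo ahi blo bhi hk]
      by_cases hg : alo < ahi ∨ blo < bhi <;> simp [pvGaps0, hg]

-- ===== VERDICT (by name: the statement is the Claim_ definition above) =====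
theorem get_nonmatching_blocks_spec : Claim_equal_get_nonmatching_blocks := by
  unfold Claim_equal_get_nonmatching_blocks
  intro lhs rhs _
  unfold Spec_get_nonmatching_blocks get_nonmatching_blocks get_nonmatching_blocks_alt
  set al := PySem.Str.splitlines lhs with hal
  set bl := PySem.Str.splitlines rhs with hbl
  set b2j := pvB2j bl 0 PySem.Dict.empty with hb2j
  have hvr : pvValidSt [(0, al.length, 0, bl.length)] := by
    intro r hr
    simp only [List.mem_singleton] at hr
    subst hr
    exact ⟨Nat.zero_le _, Nat.zero_le _⟩
  have hvrB : pvValidStB bl.length [(0, al.length, 0, bl.length)] := by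
    intro r hr
    simp only [List.mem_singleton] at hr
    subst hr
    exact ⟨Nat.zero_le _, Nat.zero_le _, le_rfl⟩
  have hcost : pvCost [(0, al.length, 0, bl.length)] ≤ 2 * (al.length + bl.length) + 8 := by
    simp [pvCost]
  -- A's side
  have hraw := pvQloop_eq al bl b2j (2 * (al.length + bl.length) + 8)
      [(0, al.length, 0, bl.length)] [] hvr hcost
  have hperm := pvRawOf_perm al bl b2j (al.length + bl.length) 0 al.length 0 bl.length
      (by omega) (by omega) (by omega)
  have hpw := pvIno_pairwise al bl b2j (al.length + bl.length) 0 al.length 0 bl.length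
      (by omega) (by omega) (by omega)
  have hsort : PySem.List.sorted2 (pvQloop al bl b2j (2 * (al.length + bl.length) + 8)
        [(0, al.length, 0, bl.length)] []) (·.1) (·.2.1) false =
      pvIno al bl b2j 0 al.length 0 bl.length := by
    rw [hraw]
    simp only [List.map_cons, List.map_nil, List.flatten_cons, List.flatten_nil,
      List.append_nil, List.nil_append]
    have hne : (pvRawOf al bl b2j 0 al.length 0 bl.length).Pairwise (fun u v => u.1 ≠ v.1) := by
      refine (List.Perm.pairwise_iff (by intro u v h; exact h.symm) hperm).mpr (hpw.imp ?_)
      exact fun h => Nat.ne_of_lt h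
    rw [pvSorted2_eq_sorted _ hne]
    exact PySem.List.sorted_eq_of_perm_of_pairwise_lt _ _ _ hperm.symm hpw
  have hmem := pvIno_mem al bl b2j (al.length + bl.length) 0 al.length 0 bl.length
      (by omega) (by omega) (by omega)
  have hA : pvA_loop (al.length : Int) (bl.length : Int) 0 0
      (pvA_lineDiffs (pvMatchingBlocks al bl)) =
      pvGt al bl b2j 0 al.length 0 bl.length := by
    show pvA_loop (al.length : Int) (bl.length : Int) ((0 : Nat) : Int) ((0 : Nat) : Int) _ = _
    rw [pvMatchingBlocks]
    rw [pvA_loop_gaps0 _ (pvMergeAdj_size_ne_zero _ 0 0 0) al.length bl.length 0 0]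
    rw [← hb2j, hsort]
    rw [pvMerge_gaps0 _ (fun y hy => (hmem y hy).2.2)]
    have := pvWalk_gaps0 al bl b2j (al.length + bl.length) 0 al.length 0 bl.length
        (by omega) (by omega) (by omega) 0 []
    simpa [pvGaps0] using this
  -- B's side
  have hB := pvBwork_eq al bl (2 * (al.length + bl.length) + 8)
      [(0, al.length, 0, bl.length)] [] hvrB hcost
  simp only [hA, hB, ← hb2j, List.map_cons, List.map_nil, List.flatten_cons, List.flatten_nil,
    List.append_nil, List.nil_append]
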